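-- pv_equiv track=rewrite | github.com/gomin0/algorithm-study | 프로그래머스/3/60063. 블록 이동하기/블록 이동하기.py | solution
-- ===== SOURCE A (Python) =====
-- from collections import deque
--
-- def solution(board):
--     visited = set()
--     n: int = len(board)
--     q = deque([(0, 0, 0, 1, 0)])
--     visited.add((0, 0, 0, 1))
--     visited.add((0, 1, 0, 0))
--     direction = [(0, 1), (1, 0), (0, -1), (-1, 0)]
--     while q:
--         sx1, sy1, sx2, sy2, d = q.popleft()
--         if (sx1 == n-1 and sy1 == n-1) or (sx2 == n-1 and sy2 == n-1):
--             return d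
--         # 상하좌우 이동
--         for i in range(4):
--             nx1 = sx1 + direction[i][0]
--             ny1 = sy1 + direction[i][1]
--             nx2 = sx2 + direction[i][0]
--             ny2 = sy2 + direction[i][1]
--
--             if 0 <= nx1 < n and 0 <= ny1 < n and 0 <= nx2 < n and 0 <= ny2 < n and board[nx1][ny1] == 0 and board[nx2][ny2] == 0:
--                 if (nx1, ny1, nx2, ny2) not in visited:
--                     visited.add((nx1, ny1, nx2, ny2))
--                     visited.add((nx2, ny2, nx1, ny1))
--                     q.append((nx1, ny1, nx2, ny2, d+1))
--         # 회전 이동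
--         if sx1 == sx2:
--             for dd in [-1, 1]:
--                 if 0 <= sx1+dd < n and 0 <= sx2+dd < n:
--                     if board[sx1+dd][sy1] == 0 and board[sx2+dd][sy2] == 0:
--                         if (sx1, sy1, sx1+dd, sy1) not in visited:
--                             visited.add((sx1, sy1, sx1+dd, sy1))
--                             visited.add((sx1+dd, sy1, sx1, sy1))
--                             q.append((sx1, sy1, sx1+dd, sy1, d+1))
--                         if (sx2, sy2, sx2+dd, sy2) not in visited:
--                             visited.add((sx2, sy2, sx2+dd, sy2))
--                             visited.add((sx2+dd, sy2, sx2, sy2))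
--                             q.append((sx2, sy2, sx2+dd, sy2, d+1))
--         elif sy1 == sy2:
--             for dd in [-1, 1]:
--                 if 0 <= sy1+dd < n and 0 <= sy2+dd < n:
--                     if board[sx1][sy1+dd] == 0 and board[sx2][sy2+dd] == 0:
--                         if (sx1, sy1, sx1, sy1+dd) not in visited:
--                             visited.add((sx1, sy1, sx1, sy1+dd))
--                             visited.add((sx1, sy1+dd, sx1, sy1))
--                             q.append((sx1, sy1, sx1, sy1+dd, d+1))
--                         if (sx2, sy2, sx2, sy2+dd) not in visited:
--                             visited.add((sx2, sy2, sx2, sy2+dd))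
--                             visited.add((sx2, sy2+dd, sx2, sy2))
--                             q.append((sx2, sy2, sx2, sy2+dd, d+1))
--
--     return -1
-- ===== SOURCE B (Python) =====
-- def solution(board):
--     # Phase 1 computes the COMPLETE distance labeling of the block-state graph by
--     # round-based saturation (every round rescans every labeled state; no queue,
--     # no frontier, no early exit); phase 2 answers with a min-query over the
--     # finished labeling.  States are canonical (sorted) pairs of occupied cells.
--     n = len(board)
--
--     def ok(r, c):
--         return 0 <= r < n and 0 <= c < n and board[r][c] == 0
--
--     def canon(p, q):
--         return (p, q) if p <= q else (q, p)
--
--     def moves(s):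
--         (r1, c1), (r2, c2) = s
--         out = []
--         for dr, dc in ((0, 1), (1, 0), (0, -1), (-1, 0)):
--             if ok(r1 + dr, c1 + dc) and ok(r2 + dr, c2 + dc):
--                 out.append(canon((r1 + dr, c1 + dc), (r2 + dr, c2 + dc)))
--         if r1 == r2:
--             for dd in (-1, 1):
--                 if ok(r1 + dd, c1) and ok(r2 + dd, c2):
--                     out.append(canon((r1, c1), (r1 + dd, c1)))
--                     out.append(canon((r2, c2), (r2 + dd, c2)))
--         elif c1 == c2:
--             for dd in (-1, 1):
--                 if ok(r1, c1 + dd) and ok(r2, c2 + dd):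
--                     out.append(canon((r1, c1), (r1, c1 + dd)))
--                     out.append(canon((r2, c2), (r2, c2 + dd)))
--         return out
--
--     # Phase 1: saturate the labeling.
--     dist = {((0, 0), (0, 1)): 0}
--     r = 0
--     while True:
--         r += 1
--         added = False
--         for s in list(dist):
--             for t in moves(s):
--                 if t not in dist:
--                     dist[t] = r
--                     added = True
--         if not added:
--             break
--
--     # Phase 2: min-query over the finished labeling.
--     goal = (n - 1, n - 1)
--     best = -1
--     for s, d in dist.items():
--         if goal in s and (best == -1 or d < best):
--             best = d
--     return best
-- ===== Notes on version B (the rewrite author's own statement) =====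
-- stated objective: alternative
-- what changed: Replaced A's single-pass deque BFS with early return (ordered 4-tuples, per-node depth tags, both orientations in visited) by a two-phase algorithm: round-based saturation that rescans every labeled state each round to build the complete distance labeling of canonical cell-pair states (the dict doubles as the visited structure), followed by a separate min-query over the finished labeling for goal-containing states.
-- outside the precondition, e.g. on solution([[3], [2, 2]]): A returns -1, B raises IndexError; on solution([[1, 0, 1], [1], [1]]): A returns -1, B returns -1
import Mathlib
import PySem

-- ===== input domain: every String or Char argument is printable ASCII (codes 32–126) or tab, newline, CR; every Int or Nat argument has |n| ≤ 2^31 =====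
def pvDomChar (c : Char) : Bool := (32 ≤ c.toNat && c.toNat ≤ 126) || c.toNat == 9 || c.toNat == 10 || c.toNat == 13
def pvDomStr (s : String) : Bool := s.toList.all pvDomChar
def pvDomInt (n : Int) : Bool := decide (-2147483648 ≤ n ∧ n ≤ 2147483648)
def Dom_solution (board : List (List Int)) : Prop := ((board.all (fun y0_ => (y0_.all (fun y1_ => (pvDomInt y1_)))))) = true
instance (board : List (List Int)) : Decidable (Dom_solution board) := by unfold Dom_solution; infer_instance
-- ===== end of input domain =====

-- B replaces A's early-return deque BFS (ordered 4-tuples, both orientations in `visited`) by a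
-- two-phase alternative: round-based saturation building the complete distance labeling of
-- canonical cell-pair states, then a min-query over that labeling; equal return values.

-- shared primitive: board[r][c] as an Option (A only evaluates it under its own bounds checks)
def pvCell (board : List (List Int)) (r c : Int) : Option Int :=
  PySem.List.pyGet? ((PySem.List.pyGet? board r).getD []) c

def pvDirs : List (Int × Int) := [(0, 1), (1, 0), (0, -1), (-1, 0)]

-- ===== PORT A =====
def pvSwap (t : Int × Int × Int × Int) : Int × Int × Int × Int :=
  (t.2.2.1, t.2.2.2, t.1, t.2.1)

def pvTag (d : Int) (t : Int × Int × Int × Int) : Int × Int × Int × Int × Int :=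
  (t.1, t.2.1, t.2.2.1, t.2.2.2, d)

-- A's translation guard: `0 <= nx1 < n and ... and board[nx1][ny1] == 0 and board[nx2][ny2] == 0`
def pvGuardT (board : List (List Int)) (n nx1 ny1 nx2 ny2 : Int) : Bool :=
  decide (0 ≤ nx1) && decide (nx1 < n) && decide (0 ≤ ny1) && decide (ny1 < n) &&
  decide (0 ≤ nx2) && decide (nx2 < n) && decide (0 ≤ ny2) && decide (ny2 < n) &&
  (pvCell board nx1 ny1 == some 0) && (pvCell board nx2 ny2 == some 0)

-- A's horizontal-rotation guard: row bounds, then the two cells above/below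
def pvGuardR (board : List (List Int)) (n nx1 sy1 nx2 sy2 : Int) : Bool :=
  decide (0 ≤ nx1) && decide (nx1 < n) && decide (0 ≤ nx2) && decide (nx2 < n) &&
  (pvCell board nx1 sy1 == some 0) && (pvCell board nx2 sy2 == some 0)

-- A's vertical-rotation guard
def pvGuardC (board : List (List Int)) (n sx1 ny1 sx2 ny2 : Int) : Bool :=
  decide (0 ≤ ny1) && decide (ny1 < n) && decide (0 ≤ ny2) && decide (ny2 < n) &&
  (pvCell board sx1 ny1 == some 0) && (pvCell board sx2 ny2 == some 0)

-- `if ok and t not in visited: visited.add(t); visited.add(swap t); q.append(t + (d+1,))`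
def pvTryAdd (d : Int) (ok : Bool) (t : Int × Int × Int × Int)
    (acc : List (Int × Int × Int × Int × Int) × PySem.Set (Int × Int × Int × Int)) :
    List (Int × Int × Int × Int × Int) × PySem.Set (Int × Int × Int × Int) :=
  if ok && !(PySem.Set.contains acc.2 t) then
    (acc.1 ++ [pvTag (d + 1) t], PySem.Set.add (PySem.Set.add acc.2 t) (pvSwap t))
  else acc

-- the body of A's while-loop after the goal test (translations, then rotations)
def pvStepA (board : List (List Int)) (n sx1 sy1 sx2 sy2 d : Int)
    (acc0 : List (Int × Int × Int × Int × Int) × PySem.Set (Int × Int × Int × Int)) :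
    List (Int × Int × Int × Int × Int) × PySem.Set (Int × Int × Int × Int) :=
  let acc1 := pvDirs.foldl (fun acc dir =>
    pvTryAdd d (pvGuardT board n (sx1 + dir.1) (sy1 + dir.2) (sx2 + dir.1) (sy2 + dir.2))
      (sx1 + dir.1, sy1 + dir.2, sx2 + dir.1, sy2 + dir.2) acc) acc0
  if sx1 == sx2 then
    [(-1 : Int), 1].foldl (fun acc dd =>
      if pvGuardR board n (sx1 + dd) sy1 (sx2 + dd) sy2 then
        pvTryAdd d true (sx2, sy2, sx2 + dd, sy2) (pvTryAdd d true (sx1, sy1, sx1 + dd, sy1) acc)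
      else acc) acc1
  else if sy1 == sy2 then
    [(-1 : Int), 1].foldl (fun acc dd =>
      if pvGuardC board n sx1 (sy1 + dd) sx2 (sy2 + dd) then
        pvTryAdd d true (sx2, sy2, sx2, sy2 + dd) (pvTryAdd d true (sx1, sy1, sx1, sy1 + dd) acc)
      else acc) acc1
  else acc1

-- ---- analysis helpers cited by pvLoopA's termination proof (pvStepA_dec) ----
def pvCands (board : List (List Int)) (n sx1 sy1 sx2 sy2 : Int) : List (Int × Int × Int × Int) :=
  (pvDirs.filterMap fun dir =>
    if pvGuardT board n (sx1 + dir.1) (sy1 + dir.2) (sx2 + dir.1) (sy2 + dir.2) then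
      some (sx1 + dir.1, sy1 + dir.2, sx2 + dir.1, sy2 + dir.2) else none)
  ++ (if sx1 == sx2 then
        [(-1 : Int), 1].flatMap fun dd =>
          if pvGuardR board n (sx1 + dd) sy1 (sx2 + dd) sy2 then
            [(sx1, sy1, sx1 + dd, sy1), (sx2, sy2, sx2 + dd, sy2)] else []
      else if sy1 == sy2 then
        [(-1 : Int), 1].flatMap fun dd =>
          if pvGuardC board n sx1 (sy1 + dd) sx2 (sy2 + dd) then
            [(sx1, sy1, sx1, sy1 + dd), (sx2, sy2, sx2, sy2 + dd)] else []
      else [])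

def pvKept (V : PySem.Set (Int × Int × Int × Int)) :
    List (Int × Int × Int × Int) → List (Int × Int × Int × Int)
  | [] => []
  | t :: ts =>
    if PySem.Set.contains V t then pvKept V ts
    else t :: pvKept (PySem.Set.add (PySem.Set.add V t) (pvSwap t)) ts

def pvNewV (V : PySem.Set (Int × Int × Int × Int)) :
    List (Int × Int × Int × Int) → PySem.Set (Int × Int × Int × Int)
  | [] => V
  | t :: ts =>
    if PySem.Set.contains V t then pvNewV V ts
    else pvNewV (PySem.Set.add (PySem.Set.add V t) (pvSwap t)) ts

theorem pvTryAdd_eq (d : Int) (ok : Bool) (t : Int × Int × Int × Int)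
    (acc : List (Int × Int × Int × Int × Int) × PySem.Set (Int × Int × Int × Int)) :
    pvTryAdd d ok t acc = if ok then pvTryAdd d true t acc else acc := by
  cases ok <;> simp [pvTryAdd]

theorem pvPushAll_eq (d : Int) (ts : List (Int × Int × Int × Int))
    (q : List (Int × Int × Int × Int × Int)) (V : PySem.Set (Int × Int × Int × Int)) :
    ts.foldl (fun acc t => pvTryAdd d true t acc) (q, V) =
      (q ++ (pvKept V ts).map (pvTag (d + 1)), pvNewV V ts) := by
  induction ts generalizing q V with
  | nil => simp [pvKept, pvNewV]
  | cons t ts ih =>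
    rw [List.foldl_cons]
    by_cases h : t ∈ V
    · have hstep : pvTryAdd d true t (q, V) = (q, V) := by simp [pvTryAdd, h]
      rw [hstep, ih]
      simp [pvKept, pvNewV, h]
    · have hstep : pvTryAdd d true t (q, V) =
          (q ++ [pvTag (d + 1) t], PySem.Set.add (PySem.Set.add V t) (pvSwap t)) := by
        simp [pvTryAdd, h]
      rw [hstep, ih]
      simp [pvKept, pvNewV, h]

theorem pvFoldl_tryAdd_filterMap {α : Type} (d : Int) (l : List α) (g : α → Bool)
    (f : α → Int × Int × Int × Int)
    (acc : List (Int × Int × Int × Int × Int) × PySem.Set (Int × Int × Int × Int)) :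
    l.foldl (fun acc x => pvTryAdd d (g x) (f x) acc) acc =
      (l.filterMap (fun x => if g x then some (f x) else none)).foldl
        (fun acc t => pvTryAdd d true t acc) acc := by
  induction l generalizing acc with
  | nil => rfl
  | cons x l ih =>
    by_cases h : g x = true
    · simp only [List.foldl_cons, List.filterMap_cons, h, if_pos, pvTryAdd_eq d (g x), ih]
    · simp only [List.foldl_cons, List.filterMap_cons, h, if_neg, pvTryAdd_eq d (g x), ih]
      simp [pvTryAdd]

theorem pvFoldl_tryAdd2_flatMap {α : Type} (d : Int) (l : List α) (g : α → Bool)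
    (f1 f2 : α → Int × Int × Int × Int)
    (acc : List (Int × Int × Int × Int × Int) × PySem.Set (Int × Int × Int × Int)) :
    l.foldl (fun acc x =>
        if g x then pvTryAdd d true (f2 x) (pvTryAdd d true (f1 x) acc) else acc) acc =
      (l.flatMap (fun x => if g x then [f1 x, f2 x] else [])).foldl
        (fun acc t => pvTryAdd d true t acc) acc := by
  induction l generalizing acc with
  | nil => rfl
  | cons x l ih =>
    by_cases h : g x = true
    · simp only [List.foldl_cons, List.flatMap_cons, h, if_pos, ih, List.foldl_append,
        List.foldl_cons, List.foldl_nil]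
    · simp only [List.foldl_cons, List.flatMap_cons, h, if_neg, ih]
      simp [h]

theorem pvStepA_eq (board : List (List Int)) (n sx1 sy1 sx2 sy2 d : Int)
    (rest : List (Int × Int × Int × Int × Int)) (V : PySem.Set (Int × Int × Int × Int)) :
    pvStepA board n sx1 sy1 sx2 sy2 d (rest, V) =
      (rest ++ (pvKept V (pvCands board n sx1 sy1 sx2 sy2)).map (pvTag (d + 1)),
       pvNewV V (pvCands board n sx1 sy1 sx2 sy2)) := by
  rw [← pvPushAll_eq]
  show pvStepA board n sx1 sy1 sx2 sy2 d (rest, V) =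
    (pvCands board n sx1 sy1 sx2 sy2).foldl (fun acc t => pvTryAdd d true t acc) (rest, V)
  unfold pvStepA pvCands
  rw [pvFoldl_tryAdd_filterMap d pvDirs
    (fun dir => pvGuardT board n (sx1 + dir.1) (sy1 + dir.2) (sx2 + dir.1) (sy2 + dir.2))
    (fun dir => (sx1 + dir.1, sy1 + dir.2, sx2 + dir.1, sy2 + dir.2)) (rest, V)]
  rw [List.foldl_append]
  by_cases h1 : (sx1 == sx2) = true
  · simp only [h1, if_pos]
    rw [pvFoldl_tryAdd2_flatMap d [(-1 : Int), 1]
      (fun dd => pvGuardR board n (sx1 + dd) sy1 (sx2 + dd) sy2)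
      (fun dd => (sx1, sy1, sx1 + dd, sy1)) (fun dd => (sx2, sy2, sx2 + dd, sy2))]
  · by_cases h2 : (sy1 == sy2) = true
    · simp only [h1, h2, if_neg, if_pos, Bool.false_eq_true, not_false_iff]
      rw [pvFoldl_tryAdd2_flatMap d [(-1 : Int), 1]
        (fun dd => pvGuardC board n sx1 (sy1 + dd) sx2 (sy2 + dd))
        (fun dd => (sx1, sy1, sx1, sy1 + dd)) (fun dd => (sx2, sy2, sx2, sy2 + dd))]
    · simp [h1, h2]

def pvIccInt (n : Int) : Finset Int :=
  (Finset.range n.toNat).image (fun k : Nat => (k : Int))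

theorem pvIccInt_mem (n x : Int) : x ∈ pvIccInt n ↔ 0 ≤ x ∧ x < n := by
  simp only [pvIccInt, Finset.mem_image, Finset.mem_range]
  constructor
  · rintro ⟨k, hk, rfl⟩; omega
  · rintro ⟨h0, h1⟩; exact ⟨x.toNat, by omega, by omega⟩

-- coordinates of any candidate: rows/cols are in range or inherited from the source state
def pvCoordOK (n sx1 sy1 sx2 sy2 c : Int) : Prop :=
  (0 ≤ c ∧ c < n) ∨ c = sx1 ∨ c = sy1 ∨ c = sx2 ∨ c = sy2

theorem pvCands_coords (board : List (List Int)) (n sx1 sy1 sx2 sy2 : Int)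
    (t : Int × Int × Int × Int) (ht : t ∈ pvCands board n sx1 sy1 sx2 sy2) :
    pvCoordOK n sx1 sy1 sx2 sy2 t.1 ∧ pvCoordOK n sx1 sy1 sx2 sy2 t.2.1 ∧
    pvCoordOK n sx1 sy1 sx2 sy2 t.2.2.1 ∧ pvCoordOK n sx1 sy1 sx2 sy2 t.2.2.2 := by
  unfold pvCands at ht
  rcases List.mem_append.mp ht with hT | hR
  · rcases List.mem_filterMap.mp hT with ⟨dir, _, heq⟩
    by_cases hg : pvGuardT board n (sx1 + dir.1) (sy1 + dir.2) (sx2 + dir.1) (sy2 + dir.2) = true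
    · rw [if_pos hg] at heq
      obtain rfl : (sx1 + dir.1, sy1 + dir.2, sx2 + dir.1, sy2 + dir.2) = t :=
        Option.some_injective _ heq
      simp only [pvGuardT, Bool.and_eq_true, decide_eq_true_eq] at hg
      simp only [pvCoordOK]
      omega
    · rw [if_neg hg] at heq; simp at heq
  · by_cases h1 : (sx1 == sx2) = true
    · rw [if_pos h1] at hR
      rcases List.mem_flatMap.mp hR with ⟨dd, _, hmem⟩
      by_cases hg : pvGuardR board n (sx1 + dd) sy1 (sx2 + dd) sy2 = true
      · rw [if_pos hg] at hmem
        simp only [pvGuardR, Bool.and_eq_true, decide_eq_true_eq] at hg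
        obtain ⟨⟨⟨⟨⟨h1a, h1b⟩, h2a⟩, h2b⟩, -⟩, -⟩ := hg
        simp only [List.mem_cons, List.mem_singleton, List.not_mem_nil, or_false] at hmem
        unfold pvCoordOK
        rcases hmem with rfl | rfl
        · exact ⟨Or.inr (Or.inl rfl), Or.inr (Or.inr (Or.inl rfl)),
            Or.inl ⟨h1a, h1b⟩, Or.inr (Or.inr (Or.inl rfl))⟩
        · exact ⟨Or.inr (Or.inr (Or.inr (Or.inl rfl))), Or.inr (Or.inr (Or.inr (Or.inr rfl))),
            Or.inl ⟨h2a, h2b⟩, Or.inr (Or.inr (Or.inr (Or.inr rfl)))⟩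
      · rw [if_neg hg] at hmem; simp at hmem
    · rw [if_neg h1] at hR
      by_cases h2 : (sy1 == sy2) = true
      · rw [if_pos h2] at hR
        rcases List.mem_flatMap.mp hR with ⟨dd, hdd, hmem⟩
        by_cases hg : pvGuardC board n sx1 (sy1 + dd) sx2 (sy2 + dd) = true
        · rw [if_pos hg] at hmem
          simp only [pvGuardC, Bool.and_eq_true, decide_eq_true_eq] at hg
          obtain ⟨⟨⟨⟨⟨h1a, h1b⟩, h2a⟩, h2b⟩, -⟩, -⟩ := hg
          simp only [List.mem_cons, List.mem_singleton, List.not_mem_nil, or_false] at hmem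
          unfold pvCoordOK
          rcases hmem with rfl | rfl
          · exact ⟨Or.inr (Or.inl rfl), Or.inr (Or.inr (Or.inl rfl)),
              Or.inr (Or.inl rfl), Or.inl ⟨h1a, h1b⟩⟩
          · exact ⟨Or.inr (Or.inr (Or.inr (Or.inl rfl))), Or.inr (Or.inr (Or.inr (Or.inr rfl))),
              Or.inr (Or.inr (Or.inr (Or.inl rfl))), Or.inl ⟨h2a, h2b⟩⟩
        · rw [if_neg hg] at hmem; simp at hmem
      · rw [if_neg h2] at hR; simp at hR

theorem pvNewV_mono (V : PySem.Set (Int × Int × Int × Int))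
    (ts : List (Int × Int × Int × Int)) : ∀ u ∈ V, u ∈ pvNewV V ts := by
  induction ts generalizing V with
  | nil => intro u hu; simpa [pvNewV] using hu
  | cons t ts ih =>
    intro u hu
    by_cases h : t ∈ V
    · simpa [pvNewV, h] using ih V u hu
    · have : u ∈ PySem.Set.add (PySem.Set.add V t) (pvSwap t) := by
        simp [PySem.Set.mem_add, hu]
      simpa [pvNewV, h] using ih _ u this

theorem pvKept_sub (V : PySem.Set (Int × Int × Int × Int))
    (ts : List (Int × Int × Int × Int)) : ∀ k ∈ pvKept V ts, k ∈ ts ∧ k ∉ V := by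
  induction ts generalizing V with
  | nil => intro k hk; simp [pvKept] at hk
  | cons t ts ih =>
    intro k hk
    by_cases h : t ∈ V
    · rcases ih V k (by simpa [pvKept, h] using hk) with ⟨h1, h2⟩
      exact ⟨List.mem_cons_of_mem _ h1, h2⟩
    · rw [pvKept, if_neg (by simpa using h)] at hk
      rcases List.mem_cons.mp hk with rfl | hk'
      · exact ⟨List.mem_cons_self, h⟩
      · rcases ih _ k hk' with ⟨h1, h2⟩
        refine ⟨List.mem_cons_of_mem _ h1, fun hkV => h2 ?_⟩
        simp [PySem.Set.mem_add, hkV]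

theorem pvKept_mem_newV (V : PySem.Set (Int × Int × Int × Int))
    (ts : List (Int × Int × Int × Int)) : ∀ k ∈ pvKept V ts, k ∈ pvNewV V ts := by
  induction ts generalizing V with
  | nil => intro k hk; simp [pvKept] at hk
  | cons t ts ih =>
    intro k hk
    by_cases h : t ∈ V
    · simpa [pvNewV, h] using ih V k (by simpa [pvKept, h] using hk)
    · rw [pvKept, if_neg (by simpa using h)] at hk
      rw [pvNewV, if_neg (by simpa using h)]
      rcases List.mem_cons.mp hk with rfl | hk'
      · exact pvNewV_mono _ ts k (by simp [PySem.Set.mem_add])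
      · exact ih _ k hk'

theorem pvKept_nil_newV (V : PySem.Set (Int × Int × Int × Int))
    (ts : List (Int × Int × Int × Int)) (h : pvKept V ts = []) : pvNewV V ts = V := by
  induction ts generalizing V with
  | nil => rfl
  | cons t ts ih =>
    by_cases hm : t ∈ V
    · rw [pvKept, if_pos (by simpa using hm)] at h
      rw [pvNewV, if_pos (by simpa using hm)]
      exact ih V h
    · rw [pvKept, if_neg (by simpa using hm)] at h
      simp at h

def pvCoordsE (q : List (Int × Int × Int × Int × Int)) : Finset Int :=
  q.foldr (fun e s => insert e.1 (insert e.2.1 (insert e.2.2.1 (insert e.2.2.2.1 s)))) ∅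

def pvSpaceE (n : Int) (q : List (Int × Int × Int × Int × Int)) :
    Finset (Int × Int × Int × Int) :=
  (pvIccInt n ∪ pvCoordsE q) ×ˢ ((pvIccInt n ∪ pvCoordsE q) ×ˢ
    ((pvIccInt n ∪ pvCoordsE q) ×ˢ (pvIccInt n ∪ pvCoordsE q)))

def pvMeasA (n : Int) (q : List (Int × Int × Int × Int × Int))
    (V : PySem.Set (Int × Int × Int × Int)) : Nat :=
  ((pvSpaceE n q).filter (fun t => ¬ t ∈ V)).card

theorem pvCoordsE_mem (q : List (Int × Int × Int × Int × Int)) (x : Int) :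
    x ∈ pvCoordsE q ↔ ∃ e ∈ q, x = e.1 ∨ x = e.2.1 ∨ x = e.2.2.1 ∨ x = e.2.2.2.1 := by
  induction q with
  | nil => simp [pvCoordsE]
  | cons e q ih =>
    simp only [pvCoordsE, List.foldr_cons, Finset.mem_insert]
    rw [show (List.foldr (fun e s =>
        insert e.1 (insert e.2.1 (insert e.2.2.1 (insert e.2.2.2.1 s)))) ∅ q) = pvCoordsE q
      from rfl]
    rw [ih]
    simp only [List.mem_cons]
    constructor
    · rintro (rfl | rfl | rfl | rfl | ⟨e', he', h⟩)
      · exact ⟨e, Or.inl rfl, Or.inl rfl⟩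
      · exact ⟨e, Or.inl rfl, Or.inr (Or.inl rfl)⟩
      · exact ⟨e, Or.inl rfl, Or.inr (Or.inr (Or.inl rfl))⟩
      · exact ⟨e, Or.inl rfl, Or.inr (Or.inr (Or.inr rfl))⟩
      · exact ⟨e', Or.inr he', h⟩
    · rintro ⟨e', (rfl | he'), h⟩
      · tauto
      · exact Or.inr (Or.inr (Or.inr (Or.inr ⟨e', he', h⟩)))

theorem pvSpaceE_mono (n : Int) (q q' : List (Int × Int × Int × Int × Int))
    (h : pvIccInt n ∪ pvCoordsE q' ⊆ pvIccInt n ∪ pvCoordsE q) :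
    pvSpaceE n q' ⊆ pvSpaceE n q := by
  unfold pvSpaceE
  exact Finset.product_subset_product h (Finset.product_subset_product h
    (Finset.product_subset_product h h))

theorem pvMeasA_le_of (n : Int) (q q' : List (Int × Int × Int × Int × Int))
    (V V' : PySem.Set (Int × Int × Int × Int))
    (hs : pvSpaceE n q' ⊆ pvSpaceE n q) (hv : ∀ u, u ∈ V → u ∈ V') :
    pvMeasA n q' V' ≤ pvMeasA n q V := by
  unfold pvMeasA
  apply Finset.card_le_card
  intro x hx
  simp only [Finset.mem_filter, decide_eq_true_eq] at hx ⊢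
  exact ⟨hs hx.1, fun hxV => hx.2 (hv x hxV)⟩


theorem pvStepA_dec (board : List (List Int)) (n sx1 sy1 sx2 sy2 d : Int)
    (rest : List (Int × Int × Int × Int × Int)) (V : PySem.Set (Int × Int × Int × Int)) :
    (pvStepA board n sx1 sy1 sx2 sy2 d (rest, V) = (rest, V)) ∨
    pvMeasA n (pvStepA board n sx1 sy1 sx2 sy2 d (rest, V)).1
        (pvStepA board n sx1 sy1 sx2 sy2 d (rest, V)).2 <
      pvMeasA n ((sx1, sy1, sx2, sy2, d) :: rest) V := by
  rw [pvStepA_eq]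
  cases hK : pvKept V (pvCands board n sx1 sy1 sx2 sy2) with
  | nil =>
    left
    rw [pvKept_nil_newV _ _ hK]
    simp
  | cons k ks =>
    right
    rw [← hK]
    show pvMeasA n (rest ++ (pvKept V (pvCands board n sx1 sy1 sx2 sy2)).map (pvTag (d + 1)))
        (pvNewV V (pvCands board n sx1 sy1 sx2 sy2)) <
      pvMeasA n ((sx1, sy1, sx2, sy2, d) :: rest) V
    have hkK : k ∈ pvKept V (pvCands board n sx1 sy1 sx2 sy2) := by
      rw [hK]; exact List.mem_cons_self
    obtain ⟨hkC, hkV⟩ := pvKept_sub V _ k hkK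
    have hkNew : k ∈ pvNewV V (pvCands board n sx1 sy1 sx2 sy2) :=
      pvKept_mem_newV V _ k hkK
    have hunion : ∀ x, pvCoordOK n sx1 sy1 sx2 sy2 x →
        x ∈ pvIccInt n ∪ pvCoordsE ((sx1, sy1, sx2, sy2, d) :: rest) := by
      intro x hx
      rcases hx with hb | rfl | rfl | rfl | rfl
      · exact Finset.mem_union_left _ ((pvIccInt_mem n x).mpr hb)
      · exact Finset.mem_union_right _ ((pvCoordsE_mem _ _).mpr
          ⟨(x, sy1, sx2, sy2, d), List.mem_cons_self, Or.inl rfl⟩)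
      · exact Finset.mem_union_right _ ((pvCoordsE_mem _ _).mpr
          ⟨(sx1, x, sx2, sy2, d), List.mem_cons_self, Or.inr (Or.inl rfl)⟩)
      · exact Finset.mem_union_right _ ((pvCoordsE_mem _ _).mpr
          ⟨(sx1, sy1, x, sy2, d), List.mem_cons_self, Or.inr (Or.inr (Or.inl rfl))⟩)
      · exact Finset.mem_union_right _ ((pvCoordsE_mem _ _).mpr
          ⟨(sx1, sy1, sx2, x, d), List.mem_cons_self, Or.inr (Or.inr (Or.inr rfl))⟩)
    have hmemS : ∀ t : Int × Int × Int × Int, t ∈ pvCands board n sx1 sy1 sx2 sy2 →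
        t ∈ pvSpaceE n ((sx1, sy1, sx2, sy2, d) :: rest) := by
      intro t htC
      obtain ⟨h1, h2, h3, h4⟩ := pvCands_coords board n sx1 sy1 sx2 sy2 t htC
      simp only [pvSpaceE, Finset.mem_product]
      exact ⟨hunion _ h1, hunion _ h2, hunion _ h3, hunion _ h4⟩
    have hkS : k ∈ pvSpaceE n ((sx1, sy1, sx2, sy2, d) :: rest) := hmemS k hkC
    have hsub : pvSpaceE n (rest ++ (pvKept V (pvCands board n sx1 sy1 sx2 sy2)).map
        (pvTag (d + 1))) ⊆ pvSpaceE n ((sx1, sy1, sx2, sy2, d) :: rest) := by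
      apply pvSpaceE_mono
      intro x hx
      rcases Finset.mem_union.mp hx with h | h
      · exact Finset.mem_union_left _ h
      · rcases (pvCoordsE_mem _ _).mp h with ⟨e', he', hh⟩
        rcases List.mem_append.mp he' with hrest | htag
        · exact Finset.mem_union_right _ ((pvCoordsE_mem _ _).mpr
            ⟨e', List.mem_cons_of_mem _ hrest, hh⟩)
        · rcases List.mem_map.mp htag with ⟨k', hk', rfl⟩
          obtain ⟨hk'C, -⟩ := pvKept_sub V _ k' hk'
          obtain ⟨h1, h2, h3, h4⟩ := pvCands_coords board n sx1 sy1 sx2 sy2 k' hk'C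
          rcases hh with rfl | rfl | rfl | rfl
          · exact hunion _ h1
          · exact hunion _ h2
          · exact hunion _ h3
          · exact hunion _ h4
    have hfsub : (pvSpaceE n (rest ++ (pvKept V (pvCands board n sx1 sy1 sx2 sy2)).map
          (pvTag (d + 1)))).filter
            (fun t => ¬ t ∈ pvNewV V (pvCands board n sx1 sy1 sx2 sy2)) ⊆
        ((pvSpaceE n ((sx1, sy1, sx2, sy2, d) :: rest)).filter (fun t => ¬ t ∈ V)).erase k := by
      intro x hx
      simp only [Finset.mem_filter, Finset.mem_erase] at hx ⊢
      refine ⟨?_, hsub hx.1, fun hxV => hx.2 (pvNewV_mono _ _ x hxV)⟩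
      rintro rfl
      exact hx.2 hkNew
    have hkF : k ∈ (pvSpaceE n ((sx1, sy1, sx2, sy2, d) :: rest)).filter (fun t => ¬ t ∈ V) :=
      Finset.mem_filter.mpr ⟨hkS, hkV⟩
    calc pvMeasA n (rest ++ (pvKept V (pvCands board n sx1 sy1 sx2 sy2)).map (pvTag (d + 1)))
          (pvNewV V (pvCands board n sx1 sy1 sx2 sy2))
        ≤ (((pvSpaceE n ((sx1, sy1, sx2, sy2, d) :: rest)).filter
            (fun t => ¬ t ∈ V)).erase k).card := by
          rw [pvMeasA]
          exact Finset.card_le_card hfsub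
      _ < pvMeasA n ((sx1, sy1, sx2, sy2, d) :: rest) V := by
          rw [pvMeasA]
          exact Finset.card_erase_lt_of_mem hkF

theorem pvMeasA_tail_le (n : Int) (e : Int × Int × Int × Int × Int)
    (q : List (Int × Int × Int × Int × Int)) (V : PySem.Set (Int × Int × Int × Int)) :
    pvMeasA n q V ≤ pvMeasA n (e :: q) V := by
  apply pvMeasA_le_of n (e :: q) q V V _ (fun u h => h)
  apply pvSpaceE_mono
  intro x hx
  rcases Finset.mem_union.mp hx with h | h
  · exact Finset.mem_union_left _ h
  · refine Finset.mem_union_right _ ?_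
    rw [pvCoordsE_mem] at h ⊢
    rcases h with ⟨e', he', hh⟩
    exact ⟨e', List.mem_cons_of_mem _ he', hh⟩

def pvLoopA (board : List (List Int)) (n : Int)
    (q : List (Int × Int × Int × Int × Int)) (V : PySem.Set (Int × Int × Int × Int)) : Int :=
  match q with
  | [] => -1
  | (sx1, sy1, sx2, sy2, d) :: rest =>
    if (sx1 == n - 1 && sy1 == n - 1) || (sx2 == n - 1 && sy2 == n - 1) then d
    else
      let acc := pvStepA board n sx1 sy1 sx2 sy2 d (rest, V)
      pvLoopA board n acc.1 acc.2
termination_by (pvMeasA n q V, q.length)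
decreasing_by
  rcases pvStepA_dec board n sx1 sy1 sx2 sy2 d rest V with h | h
  · rw [h]
    rcases Nat.lt_or_ge (pvMeasA n rest V) (pvMeasA n ((sx1, sy1, sx2, sy2, d) :: rest) V) with
      hlt | hge
    · exact Prod.Lex.left _ _ hlt
    · have : pvMeasA n rest V = pvMeasA n ((sx1, sy1, sx2, sy2, d) :: rest) V :=
        le_antisymm (pvMeasA_tail_le n _ rest V) hge
      rw [this]
      exact Prod.Lex.right _ (Nat.lt_succ_self _)
  · exact Prod.Lex.left _ _ h

def solution (board : List (List Int)) : Int :=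
  let n : Int := board.length
  pvLoopA board n [(0, 0, 0, 1, 0)]
    (PySem.Set.add (PySem.Set.add PySem.Set.empty (0, 0, 0, 1)) (0, 1, 0, 0))
-- ===== PORT B =====
def pvFree (board : List (List Int)) (n r c : Int) : Bool :=
  decide (0 ≤ r) && decide (r < n) && decide (0 ≤ c) && decide (c < n) &&
  (pvCell board r c == some 0)

def pvLeC (a b : Int × Int) : Bool :=
  decide (a.1 < b.1) || (a.1 == b.1 && decide (a.2 ≤ b.2))

def pvNorm (a b : Int × Int) : (Int × Int) × (Int × Int) :=
  if pvLeC a b then (a, b) else (b, a)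

-- `moves(s)` of Source B
def pvNbrs (board : List (List Int)) (n : Int) (s : (Int × Int) × (Int × Int)) :
    List ((Int × Int) × (Int × Int)) :=
  let base := pvDirs.foldl (fun acc dir =>
    if pvFree board n (s.1.1 + dir.1) (s.1.2 + dir.2) &&
       pvFree board n (s.2.1 + dir.1) (s.2.2 + dir.2) then
      acc ++ [pvNorm (s.1.1 + dir.1, s.1.2 + dir.2) (s.2.1 + dir.1, s.2.2 + dir.2)]
    else acc) []
  if s.1.1 == s.2.1 then
    [(-1 : Int), 1].foldl (fun acc dd =>
      if pvFree board n (s.1.1 + dd) s.1.2 && pvFree board n (s.2.1 + dd) s.2.2 then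
        acc ++ [pvNorm (s.1.1, s.1.2) (s.1.1 + dd, s.1.2), pvNorm (s.2.1, s.2.2) (s.2.1 + dd, s.2.2)]
      else acc) base
  else if s.1.2 == s.2.2 then
    [(-1 : Int), 1].foldl (fun acc dd =>
      if pvFree board n s.1.1 (s.1.2 + dd) && pvFree board n s.2.1 (s.2.2 + dd) then
        acc ++ [pvNorm (s.1.1, s.1.2) (s.1.1, s.1.2 + dd), pvNorm (s.2.1, s.2.2) (s.2.1, s.2.2 + dd)]
      else acc) base
  else base

-- ---- analysis helpers cited by pvSatLoop's termination proof ----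
def pvCoordsB (q : List ((Int × Int) × (Int × Int))) : Finset Int :=
  q.foldr (fun e s => insert e.1.1 (insert e.1.2 (insert e.2.1 (insert e.2.2 s)))) ∅

theorem pvCoordsB_mem (q : List ((Int × Int) × (Int × Int))) (x : Int) :
    x ∈ pvCoordsB q ↔ ∃ e ∈ q, x = e.1.1 ∨ x = e.1.2 ∨ x = e.2.1 ∨ x = e.2.2 := by
  induction q with
  | nil => simp [pvCoordsB]
  | cons e q ih =>
    simp only [pvCoordsB, List.foldr_cons, Finset.mem_insert]
    rw [show (List.foldr (fun e s =>
        insert e.1.1 (insert e.1.2 (insert e.2.1 (insert e.2.2 s)))) ∅ q) = pvCoordsB q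
      from rfl]
    rw [ih]
    simp only [List.mem_cons]
    constructor
    · rintro (rfl | rfl | rfl | rfl | ⟨e', he', h⟩)
      · exact ⟨e, Or.inl rfl, Or.inl rfl⟩
      · exact ⟨e, Or.inl rfl, Or.inr (Or.inl rfl)⟩
      · exact ⟨e, Or.inl rfl, Or.inr (Or.inr (Or.inl rfl))⟩
      · exact ⟨e, Or.inl rfl, Or.inr (Or.inr (Or.inr rfl))⟩
      · exact ⟨e', Or.inr he', h⟩
    · rintro ⟨e', (rfl | he'), h⟩
      · tauto
      · exact Or.inr (Or.inr (Or.inr (Or.inr ⟨e', he', h⟩)))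

def pvSpaceB (n : Int) (q : List ((Int × Int) × (Int × Int))) :
    Finset ((Int × Int) × (Int × Int)) :=
  ((pvIccInt n ∪ pvCoordsB q) ×ˢ (pvIccInt n ∪ pvCoordsB q)) ×ˢ
    ((pvIccInt n ∪ pvCoordsB q) ×ˢ (pvIccInt n ∪ pvCoordsB q))

theorem pvFoldl_append_mem {α β : Type} (l : List β) (p : β → Bool) (f : β → List α)
    (acc : List α) (x : α)
    (hx : x ∈ l.foldl (fun acc b => if p b then acc ++ f b else acc) acc) :
    x ∈ acc ∨ ∃ b ∈ l, p b = true ∧ x ∈ f b := by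
  induction l generalizing acc with
  | nil => exact Or.inl hx
  | cons b l ih =>
    rw [List.foldl_cons] at hx
    by_cases hp : p b = true
    · rw [if_pos hp] at hx
      rcases ih _ hx with h | ⟨b', hb', h1, h2⟩
      · rcases List.mem_append.mp h with h | h
        · exact Or.inl h
        · exact Or.inr ⟨b, List.mem_cons_self, hp, h⟩
      · exact Or.inr ⟨b', List.mem_cons_of_mem _ hb', h1, h2⟩
    · rw [if_neg hp] at hx
      rcases ih _ hx with h | ⟨b', hb', h1, h2⟩
      · exact Or.inl h
      · exact Or.inr ⟨b', List.mem_cons_of_mem _ hb', h1, h2⟩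

theorem pvNorm_memP (S : Finset Int) (a b : Int × Int)
    (ha1 : a.1 ∈ S) (ha2 : a.2 ∈ S) (hb1 : b.1 ∈ S) (hb2 : b.2 ∈ S) :
    pvNorm a b ∈ (S ×ˢ S) ×ˢ (S ×ˢ S) := by
  unfold pvNorm
  split <;> simp only [Finset.mem_product] <;> exact ⟨⟨by assumption, by assumption⟩,
    by assumption, by assumption⟩

theorem pvFree_bounds (board : List (List Int)) (n r c : Int)
    (h : pvFree board n r c = true) : 0 ≤ r ∧ r < n ∧ 0 ≤ c ∧ c < n := by
  simp only [pvFree, Bool.and_eq_true, decide_eq_true_eq] at h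
  tauto

theorem pvNbrs_coords (board : List (List Int)) (n : Int) (s : (Int × Int) × (Int × Int))
    (S : Finset Int) (hIcc : ∀ x : Int, 0 ≤ x → x < n → x ∈ S)
    (h1 : s.1.1 ∈ S) (h2 : s.1.2 ∈ S) (h3 : s.2.1 ∈ S) (h4 : s.2.2 ∈ S) :
    ∀ x ∈ pvNbrs board n s, x ∈ (S ×ˢ S) ×ˢ (S ×ˢ S) := by
  intro x hx
  unfold pvNbrs at hx
  have hbase : ∀ y, y ∈ pvDirs.foldl (fun acc dir =>
      if pvFree board n (s.1.1 + dir.1) (s.1.2 + dir.2) &&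
         pvFree board n (s.2.1 + dir.1) (s.2.2 + dir.2) then
        acc ++ [pvNorm (s.1.1 + dir.1, s.1.2 + dir.2) (s.2.1 + dir.1, s.2.2 + dir.2)]
      else acc) [] → y ∈ (S ×ˢ S) ×ˢ (S ×ˢ S) := by
    intro y hy
    rcases pvFoldl_append_mem _ _ _ _ _ hy with h | ⟨dir, _, hcond, hmem⟩
    · simp at h
    · rw [Bool.and_eq_true] at hcond
      obtain ⟨ha1, ha2, ha3, ha4⟩ := pvFree_bounds _ _ _ _ hcond.1
      obtain ⟨hb1, hb2, hb3, hb4⟩ := pvFree_bounds _ _ _ _ hcond.2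
      rcases List.mem_singleton.mp hmem with rfl
      exact pvNorm_memP S _ _ (hIcc _ ha1 ha2) (hIcc _ ha3 ha4) (hIcc _ hb1 hb2) (hIcc _ hb3 hb4)
  split at hx
  · rcases pvFoldl_append_mem _ _ _ _ _ hx with h | ⟨dd, _, hcond, hmem⟩
    · exact hbase x h
    · rw [Bool.and_eq_true] at hcond
      obtain ⟨ha1, ha2, -, -⟩ := pvFree_bounds _ _ _ _ hcond.1
      obtain ⟨hb1, hb2, -, -⟩ := pvFree_bounds _ _ _ _ hcond.2
      rcases List.mem_cons.mp hmem with rfl | hmem'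
      · exact pvNorm_memP S _ _ h1 h2 (hIcc _ ha1 ha2) h2
      · rcases List.mem_singleton.mp hmem' with rfl
        exact pvNorm_memP S _ _ h3 h4 (hIcc _ hb1 hb2) h4
  · split at hx
    · rcases pvFoldl_append_mem _ _ _ _ _ hx with h | ⟨dd, _, hcond, hmem⟩
      · exact hbase x h
      · rw [Bool.and_eq_true] at hcond
        obtain ⟨-, -, ha3, ha4⟩ := pvFree_bounds _ _ _ _ hcond.1
        obtain ⟨-, -, hb3, hb4⟩ := pvFree_bounds _ _ _ _ hcond.2
        rcases List.mem_cons.mp hmem with rfl | hmem'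
        · exact pvNorm_memP S _ _ h1 h2 h1 (hIcc _ ha3 ha4)
        · rcases List.mem_singleton.mp hmem' with rfl
          exact pvNorm_memP S _ _ h3 h4 h3 (hIcc _ hb3 hb4)
    · exact hbase x hx

theorem pvSpaceB_mono (n : Int) (q q' : List ((Int × Int) × (Int × Int)))
    (h : ∀ x ∈ q', x ∈ pvSpaceB n q) : pvSpaceB n q' ⊆ pvSpaceB n q := by
  have hS : pvIccInt n ∪ pvCoordsB q' ⊆ pvIccInt n ∪ pvCoordsB q := by
    intro y hy
    rcases Finset.mem_union.mp hy with hy | hy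
    · exact Finset.mem_union_left _ hy
    · rcases (pvCoordsB_mem q' y).mp hy with ⟨e, he, hcoord⟩
      have := h e he
      simp only [pvSpaceB, Finset.mem_product] at this
      rcases hcoord with rfl | rfl | rfl | rfl
      · exact this.1.1
      · exact this.1.2
      · exact this.2.1
      · exact this.2.2
  unfold pvSpaceB
  exact Finset.product_subset_product (Finset.product_subset_product hS hS)
    (Finset.product_subset_product hS hS)

theorem pvKeys_mem_spaceB (n : Int) (q : List ((Int × Int) × (Int × Int))) :
    ∀ x ∈ q, x ∈ pvSpaceB n q := by
  intro x hx
  have hc : ∀ y : Int, (y = x.1.1 ∨ y = x.1.2 ∨ y = x.2.1 ∨ y = x.2.2) →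
      y ∈ pvIccInt n ∪ pvCoordsB q := by
    intro y hy
    exact Finset.mem_union_right _ ((pvCoordsB_mem q y).mpr ⟨x, hx, hy⟩)
  simp only [pvSpaceB, Finset.mem_product]
  exact ⟨⟨hc _ (Or.inl rfl), hc _ (Or.inr (Or.inl rfl))⟩,
    hc _ (Or.inr (Or.inr (Or.inl rfl))), hc _ (Or.inr (Or.inr (Or.inr rfl)))⟩

-- one round of Source B's saturation loop: rescan every labeled state
def pvRound (board : List (List Int)) (n : Int)
    (D : PySem.Dict ((Int × Int) × (Int × Int)) Int) (r : Int) :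
    PySem.Dict ((Int × Int) × (Int × Int)) Int × Bool :=
  (PySem.Dict.keys D).foldl (fun acc s =>
    (pvNbrs board n s).foldl (fun acc t =>
      if PySem.Dict.contains acc.1 t then acc
      else (PySem.Dict.insert acc.1 t r, true)) acc) (D, false)

-- characterization of the inner fold (cited by pvRound_spec)
theorem pvRoundInner (r : Int) (cs : List ((Int × Int) × (Int × Int))) :
    ∀ (acc : PySem.Dict ((Int × Int) × (Int × Int)) Int × Bool),
    (∀ x, (cs.foldl (fun acc t => if PySem.Dict.contains acc.1 t then acc
        else (PySem.Dict.insert acc.1 t r, true)) acc).1.get? x =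
      if PySem.Dict.contains acc.1 x = true then acc.1.get? x
      else if x ∈ cs then some r else none) ∧
    (∀ x, (cs.foldl (fun acc t => if PySem.Dict.contains acc.1 t then acc
        else (PySem.Dict.insert acc.1 t r, true)) acc).1.contains x =
      (acc.1.contains x || decide (x ∈ cs))) ∧
    ((cs.foldl (fun acc t => if PySem.Dict.contains acc.1 t then acc
        else (PySem.Dict.insert acc.1 t r, true)) acc).2 =
      (acc.2 || cs.any (fun t => ! acc.1.contains t))) ∧
    ((acc.1.keys.Nodup) → (cs.foldl (fun acc t => if PySem.Dict.contains acc.1 t then acc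
        else (PySem.Dict.insert acc.1 t r, true)) acc).1.keys.Nodup) := by
  induction cs with
  | nil =>
    intro acc
    refine ⟨?_, ?_, by simp, fun h => h⟩
    · intro x
      by_cases h : PySem.Dict.contains acc.1 x = true <;> simp [h]
      rw [PySem.Dict.get?_eq_none_iff_contains]
      simpa using h
    · intro x; simp
  | cons t cs ih =>
    intro acc
    rw [List.foldl_cons]
    by_cases hc : PySem.Dict.contains acc.1 t = true
    · rw [if_pos hc]
      obtain ⟨ih1, ih2, ih3, ih4⟩ := ih acc
      refine ⟨?_, ?_, ?_, ih4⟩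
      · intro x
        rw [ih1 x]
        by_cases hx : PySem.Dict.contains acc.1 x = true
        · simp [hx]
        · simp only [hx, Bool.false_eq_true, if_false]
          by_cases hxt : x = t
          · subst hxt; exact absurd hc hx
          · simp [List.mem_cons, hxt]
      · intro x
        rw [ih2 x]
        by_cases hxt : x = t
        · subst hxt; simp [hc]
        · simp [List.mem_cons, hxt]
      · rw [ih3]
        simp [hc]
    · rw [if_neg hc]
      obtain ⟨ih1, ih2, ih3, ih4⟩ := ih (PySem.Dict.insert acc.1 t r, true)
      refine ⟨?_, ?_, ?_, ?_⟩
      · intro x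
        rw [ih1 x]
        show (if (PySem.Dict.insert acc.1 t r).contains x = true
            then (PySem.Dict.insert acc.1 t r).get? x else _) = _
        rw [PySem.Dict.contains_insert, PySem.Dict.get?_insert]
        by_cases hxt : x = t
        · subst hxt
          simp [hc, List.mem_cons]
        · have hbeq : (x == t) = false := by simpa using hxt
          rw [hbeq, Bool.false_or, if_neg hxt]
          by_cases hx : PySem.Dict.contains acc.1 x = true
          · simp [hx]
          · simp [hx, List.mem_cons, hxt]
      · intro x
        rw [ih2 x]
        show ((PySem.Dict.insert acc.1 t r).contains x || _) = _
        rw [PySem.Dict.contains_insert]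
        by_cases hxt : x = t
        · subst hxt; simp [List.mem_cons]
        · have hbeq : (x == t) = false := by simpa using hxt
          rw [hbeq]
          simp [List.mem_cons, hxt, Bool.or_assoc]
      · rw [ih3]
        simp [hc]
      · intro hnd
        apply ih4
        exact PySem.Dict.nodup_keys_insert acc.1 t r hnd
-- characterization of one whole round (cited by pvSatLoop's termination proof)
theorem pvRound_spec (board : List (List Int)) (n : Int) (r : Int)
    (G : List ((Int × Int) × (Int × Int))) :
    ∀ (acc : PySem.Dict ((Int × Int) × (Int × Int)) Int × Bool),
    (∀ x, (G.foldl (fun acc s => (pvNbrs board n s).foldl (fun acc t =>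
        if PySem.Dict.contains acc.1 t then acc
        else (PySem.Dict.insert acc.1 t r, true)) acc) acc).1.get? x =
      if PySem.Dict.contains acc.1 x = true then acc.1.get? x
      else if ∃ s ∈ G, x ∈ pvNbrs board n s then some r else none) ∧
    (∀ x, (G.foldl (fun acc s => (pvNbrs board n s).foldl (fun acc t =>
        if PySem.Dict.contains acc.1 t then acc
        else (PySem.Dict.insert acc.1 t r, true)) acc) acc).1.contains x =
      (acc.1.contains x || decide (∃ s ∈ G, x ∈ pvNbrs board n s))) ∧
    ((G.foldl (fun acc s => (pvNbrs board n s).foldl (fun acc t =>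
        if PySem.Dict.contains acc.1 t then acc
        else (PySem.Dict.insert acc.1 t r, true)) acc) acc).2 =
      (acc.2 || decide (∃ s ∈ G, ∃ t ∈ pvNbrs board n s, acc.1.contains t = false))) ∧
    ((acc.1.keys.Nodup) → (G.foldl (fun acc s => (pvNbrs board n s).foldl (fun acc t =>
        if PySem.Dict.contains acc.1 t then acc
        else (PySem.Dict.insert acc.1 t r, true)) acc) acc).1.keys.Nodup) := by
  induction G with
  | nil =>
    intro acc
    refine ⟨?_, ?_, by simp, fun h => h⟩
    · intro x
      by_cases h : PySem.Dict.contains acc.1 x = true <;> simp [h]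
      rw [PySem.Dict.get?_eq_none_iff_contains]
      simpa using h
    · intro x; simp
  | cons g G ih =>
    intro acc
    rw [List.foldl_cons]
    obtain ⟨in1, in2, in3, in4⟩ := pvRoundInner r (pvNbrs board n g) acc
    set acc1 := (pvNbrs board n g).foldl (fun acc t =>
      if PySem.Dict.contains acc.1 t then acc
      else (PySem.Dict.insert acc.1 t r, true)) acc with hacc1
    obtain ⟨ih1, ih2, ih3, ih4⟩ := ih acc1
    refine ⟨?_, ?_, ?_, fun h => ih4 (in4 h)⟩
    · intro x
      rw [ih1 x, in1 x, in2 x]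
      by_cases hx : PySem.Dict.contains acc.1 x = true
      · simp [hx]
      · simp only [hx, Bool.false_eq_true, if_false, Bool.false_or]
        by_cases hg : x ∈ pvNbrs board n g
        · have hcons : ∃ s ∈ g :: G, x ∈ pvNbrs board n s := ⟨g, List.mem_cons_self, hg⟩
          simp [hg, hcons]
        · have : decide (x ∈ pvNbrs board n g) = false := by simpa using hg
          rw [this]
          simp only [Bool.false_eq_true, if_false]
          by_cases hG : ∃ s ∈ G, x ∈ pvNbrs board n s
          · rw [if_pos hG, if_pos ?_]
            rcases hG with ⟨s, hs, hxs⟩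
            exact ⟨s, List.mem_cons_of_mem _ hs, hxs⟩
          · rw [if_neg hG, if_neg ?_]
            rintro ⟨s, hs, hxs⟩
            rcases List.mem_cons.mp hs with rfl | hs'
            · exact hg hxs
            · exact hG ⟨s, hs', hxs⟩
    · intro x
      rw [ih2 x, in2 x, Bool.or_assoc]
      congr 1
      apply Bool.eq_iff_iff.mpr
      simp only [Bool.or_eq_true, decide_eq_true_eq]
      constructor
      · rintro (hg | ⟨s, hs, hxs⟩)
        · exact ⟨g, List.mem_cons_self, hg⟩
        · exact ⟨s, List.mem_cons_of_mem _ hs, hxs⟩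
      · rintro ⟨s, hs, hxs⟩
        rcases List.mem_cons.mp hs with rfl | hs'
        · exact Or.inl hxs
        · exact Or.inr ⟨s, hs', hxs⟩
    · rw [ih3, in3]
      rw [Bool.or_assoc]
      congr 1
      apply Bool.eq_iff_iff.mpr
      rw [Bool.or_eq_true, List.any_eq_true, decide_eq_true_eq, decide_eq_true_eq]
      constructor
      · rintro (⟨t, ht, hnt⟩ | ⟨s, hs, t, ht, hnt⟩)
        · refine ⟨g, List.mem_cons_self, t, ht, by simpa using hnt⟩
        · rw [in2 t, Bool.or_eq_false_iff] at hnt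
          exact ⟨s, List.mem_cons_of_mem _ hs, t, ht, hnt.1⟩
      · rintro ⟨s, hs, t, ht, hnt⟩
        rcases List.mem_cons.mp hs with rfl | hs'
        · exact Or.inl ⟨t, ht, by simpa using hnt⟩
        · by_cases hg : t ∈ pvNbrs board n g
          · exact Or.inl ⟨t, hg, by simpa using hnt⟩
          · refine Or.inr ⟨s, hs', t, ht, ?_⟩
            rw [in2 t]
            simp [hnt, hg]

-- termination measure for the saturation loop
def pvMeasD (n : Int) (D : PySem.Dict ((Int × Int) × (Int × Int)) Int) : Nat :=
  ((pvSpaceB n (PySem.Dict.keys D)).filter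
    (fun t => ¬ t ∈ PySem.Dict.keys D)).card

theorem pvRound_dec (board : List (List Int)) (n : Int)
    (D : PySem.Dict ((Int × Int) × (Int × Int)) Int) (r : Int)
    (h : (pvRound board n D r).2 = true) :
    pvMeasD n (pvRound board n D r).1 < pvMeasD n D := by
  obtain ⟨h1, h2, h3, -⟩ := pvRound_spec board n r (PySem.Dict.keys D) (D, false)
  rw [pvRound] at h ⊢
  rw [h3] at h
  simp only [Bool.false_or, decide_eq_true_eq] at h
  obtain ⟨s0, hs0, t0, ht0, hnt0⟩ := h
  set D2 := ((PySem.Dict.keys D).foldl (fun acc s => (pvNbrs board n s).foldl (fun acc t =>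
    if PySem.Dict.contains acc.1 t then acc
    else (PySem.Dict.insert acc.1 t r, true)) acc) (D, false)).1 with hD2
  have hmemK : ∀ x, x ∈ PySem.Dict.keys D2 ↔
      x ∈ PySem.Dict.keys D ∨ ∃ s ∈ PySem.Dict.keys D, x ∈ pvNbrs board n s := by
    intro x
    rw [← PySem.Dict.contains_iff_mem_keys _ _, ← PySem.Dict.contains_iff_mem_keys, h2 x]
    simp
  have hnbrS : ∀ s ∈ PySem.Dict.keys D, ∀ x ∈ pvNbrs board n s,
      x ∈ pvSpaceB n (PySem.Dict.keys D) := by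
    intro s hs
    apply pvNbrs_coords board n s (pvIccInt n ∪ pvCoordsB (PySem.Dict.keys D))
    · intro y hy1 hy2
      exact Finset.mem_union_left _ ((pvIccInt_mem n y).mpr ⟨hy1, hy2⟩)
    · exact Finset.mem_union_right _ ((pvCoordsB_mem _ _).mpr ⟨s, hs, Or.inl rfl⟩)
    · exact Finset.mem_union_right _ ((pvCoordsB_mem _ _).mpr ⟨s, hs, Or.inr (Or.inl rfl)⟩)
    · exact Finset.mem_union_right _ ((pvCoordsB_mem _ _).mpr
        ⟨s, hs, Or.inr (Or.inr (Or.inl rfl))⟩)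
    · exact Finset.mem_union_right _ ((pvCoordsB_mem _ _).mpr
        ⟨s, hs, Or.inr (Or.inr (Or.inr rfl))⟩)
  have hspace : pvSpaceB n (PySem.Dict.keys D2) ⊆ pvSpaceB n (PySem.Dict.keys D) := by
    apply pvSpaceB_mono
    intro x hx
    rcases (hmemK x).mp hx with h | ⟨s, hs, hxs⟩
    · exact pvKeys_mem_spaceB n _ x h
    · exact hnbrS s hs x hxs
  have ht0K : t0 ∉ PySem.Dict.keys D := by
    rw [← PySem.Dict.contains_iff_mem_keys _ _]
    simp [hnt0]
  have ht0K2 : t0 ∈ PySem.Dict.keys D2 := (hmemK t0).mpr (Or.inr ⟨s0, hs0, ht0⟩)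
  have ht0F : t0 ∈ (pvSpaceB n (PySem.Dict.keys D)).filter
      (fun t => ¬ t ∈ PySem.Dict.keys D) :=
    Finset.mem_filter.mpr ⟨hnbrS s0 hs0 t0 ht0, ht0K⟩
  have hsub : (pvSpaceB n (PySem.Dict.keys D2)).filter (fun t => ¬ t ∈ PySem.Dict.keys D2) ⊆
      ((pvSpaceB n (PySem.Dict.keys D)).filter (fun t => ¬ t ∈ PySem.Dict.keys D)).erase t0 := by
    intro x hx
    simp only [Finset.mem_filter, Finset.mem_erase] at hx ⊢
    refine ⟨?_, hspace hx.1, fun hxK => hx.2 ((hmemK x).mpr (Or.inl hxK))⟩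
    rintro rfl
    exact hx.2 ht0K2
  calc pvMeasD n D2
      ≤ (((pvSpaceB n (PySem.Dict.keys D)).filter
          (fun t => ¬ t ∈ PySem.Dict.keys D)).erase t0).card := Finset.card_le_card hsub
    _ < pvMeasD n D := Finset.card_erase_lt_of_mem ht0F

-- Source B's `while True: r += 1; ...; if not added: break` saturation loop
def pvSatLoop (board : List (List Int)) (n : Int)
    (D : PySem.Dict ((Int × Int) × (Int × Int)) Int) (r : Int) :
    PySem.Dict ((Int × Int) × (Int × Int)) Int :=
  let res := pvRound board n D (r + 1)
  if h : res.2 = true then pvSatLoop board n res.1 (r + 1) else res.1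
termination_by pvMeasD n D
decreasing_by exact pvRound_dec board n D (r + 1) h

-- Source B's phase 2: `for s, d in dist.items(): if goal in s and (best == -1 or d < best): best = d`
def pvMinQuery (n : Int) (D : PySem.Dict ((Int × Int) × (Int × Int)) Int) : Int :=
  (PySem.Dict.items D).foldl (fun best p =>
    if ((p.1.1 == ((n : Int) - 1, (n : Int) - 1)) || (p.1.2 == ((n : Int) - 1, (n : Int) - 1))) &&
       ((best == -1) || decide (p.2 < best)) then p.2 else best) (-1)

def solution_alt (board : List (List Int)) : Int :=
  let n : Int := board.length
  pvMinQuery n (pvSatLoop board n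
    (PySem.Dict.insert PySem.Dict.empty ((0, 0), (0, 1)) 0) 0)
-- ===== PRECONDITION & SPEC =====
-- Pre_ excludes ragged boards on which the BFS may read past the end of a short row and raise
-- IndexError; it admits rectangular-wide boards, boards of size ≤ 1 (nothing is ever read), and
-- ragged boards whose two entry cells (0,1) and (1,0) exist and are blocked (the walk never
-- leaves the start, so no other cell is read).
def Pre_solution (board : List (List Int)) : Prop :=
  (∀ row ∈ board, board.length ≤ row.length) ∨
  board.length ≤ 1 ∨
  (2 ≤ board.length ∧
    2 ≤ (board.getD 0 []).length ∧ (board.getD 0 []).getD 1 0 ≠ 0 ∧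
    1 ≤ (board.getD 1 []).length ∧ (board.getD 1 []).getD 0 0 ≠ 0)
instance (board : List (List Int)) : Decidable (Pre_solution board) := by
  unfold Pre_solution; infer_instance

def pvWitness_solution : List (List Int) := [[0, 0], [0, 0]]

def Spec_solution (board : List (List Int)) (out : Int) : Prop := out = solution_alt board
instance (board : List (List Int)) (out : Int) : Decidable (Spec_solution board out) := by
  unfold Spec_solution; infer_instance

-- ===== CLAIM (what is proved, stated in full; the proofs are below) =====
def Claim_equal_solution : Prop :=
  ∀ (board : List (List Int)), Dom_solution board → Pre_solution board →
    Spec_solution board (solution board)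

-- ===== LEMMAS AND PROOFS =====

-- ---- the intermediate level-synchronized BFS over normalized pair states (proof-only) ----
def pvMeasB (n : Int) (q : List ((Int × Int) × (Int × Int)))
    (V : PySem.Set ((Int × Int) × (Int × Int))) : Nat :=
  ((pvSpaceB n q).filter (fun t => ¬ t ∈ V)).card

theorem pvMeasB_add_lt (n : Int) (q : List ((Int × Int) × (Int × Int)))
    (V : PySem.Set ((Int × Int) × (Int × Int))) (t : (Int × Int) × (Int × Int))
    (htS : t ∈ pvSpaceB n q) (htV : t ∉ V) :
    pvMeasB n q (PySem.Set.add V t) < pvMeasB n q V := by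
  have hsub : (pvSpaceB n q).filter (fun x => ¬ x ∈ PySem.Set.add V t) ⊆
      ((pvSpaceB n q).filter (fun x => ¬ x ∈ V)).erase t := by
    intro x hx
    simp only [Finset.mem_filter, Finset.mem_erase] at hx ⊢
    refine ⟨?_, hx.1, fun hxV => hx.2 (by simp [PySem.Set.mem_add, hxV])⟩
    rintro rfl
    exact hx.2 (by simp [PySem.Set.mem_add])
  calc pvMeasB n q (PySem.Set.add V t)
      ≤ (((pvSpaceB n q).filter (fun x => ¬ x ∈ V)).erase t).card := Finset.card_le_card hsub
    _ < pvMeasB n q V :=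
        Finset.card_erase_lt_of_mem (Finset.mem_filter.mpr ⟨htS, htV⟩)

theorem pvInner_dec (board : List (List Int)) (n : Int)
    (F : List ((Int × Int) × (Int × Int))) (visited : PySem.Set ((Int × Int) × (Int × Int)))
    (cs : List ((Int × Int) × (Int × Int))) (hcs : ∀ x ∈ cs, x ∈ pvSpaceB n F) :
    ∀ acc : PySem.Set ((Int × Int) × (Int × Int)) × PySem.Set ((Int × Int) × (Int × Int)),
    pvMeasB n F acc.2 ≤ pvMeasB n F visited →
    (acc.1 ≠ [] → pvMeasB n F acc.2 < pvMeasB n F visited) →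
    (∀ x ∈ acc.1, x ∈ pvSpaceB n F) →
    pvMeasB n F (cs.foldl (fun acc t => if PySem.Set.contains acc.2 t then acc
        else (PySem.Set.add acc.1 t, PySem.Set.add acc.2 t)) acc).2 ≤ pvMeasB n F visited ∧
    ((cs.foldl (fun acc t => if PySem.Set.contains acc.2 t then acc
        else (PySem.Set.add acc.1 t, PySem.Set.add acc.2 t)) acc).1 ≠ [] →
      pvMeasB n F (cs.foldl (fun acc t => if PySem.Set.contains acc.2 t then acc
        else (PySem.Set.add acc.1 t, PySem.Set.add acc.2 t)) acc).2 < pvMeasB n F visited) ∧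
    (∀ x ∈ (cs.foldl (fun acc t => if PySem.Set.contains acc.2 t then acc
        else (PySem.Set.add acc.1 t, PySem.Set.add acc.2 t)) acc).1, x ∈ pvSpaceB n F) := by
  induction cs with
  | nil => intro acc hle hlt hsp; exact ⟨hle, hlt, hsp⟩
  | cons t cs ih =>
    intro acc hle hlt hsp
    rw [List.foldl_cons]
    by_cases hc : PySem.Set.contains acc.2 t = true
    · rw [if_pos hc]
      exact ih (fun x hx => hcs x (List.mem_cons_of_mem _ hx)) acc hle hlt hsp
    · rw [if_neg hc]
      have htV : t ∉ acc.2 := fun h => hc (List.elem_eq_true_of_mem h)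
      have hlt2 : pvMeasB n F (PySem.Set.add acc.2 t) < pvMeasB n F visited :=
        lt_of_lt_of_le (pvMeasB_add_lt n F acc.2 t (hcs t List.mem_cons_self) htV) hle
      refine ih (fun x hx => hcs x (List.mem_cons_of_mem _ hx)) _
        (le_of_lt hlt2) (fun _ => hlt2) ?_
      intro x hx
      rcases (PySem.Set.mem_add _ _ _).mp hx with h | rfl
      · exact hsp x h
      · exact hcs x List.mem_cons_self

def pvStepB (board : List (List Int)) (n : Int)
    (F : List ((Int × Int) × (Int × Int))) (visited : PySem.Set ((Int × Int) × (Int × Int))) :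
    PySem.Set ((Int × Int) × (Int × Int)) × PySem.Set ((Int × Int) × (Int × Int)) :=
  F.foldl (fun acc s =>
    (pvNbrs board n s).foldl (fun acc t =>
      if PySem.Set.contains acc.2 t then acc
      else (PySem.Set.add acc.1 t, PySem.Set.add acc.2 t)) acc)
    (PySem.Set.empty, visited)

theorem pvStepB_dec (board : List (List Int)) (n : Int)
    (F : List ((Int × Int) × (Int × Int))) (visited : PySem.Set ((Int × Int) × (Int × Int))) :
    pvMeasB n F (pvStepB board n F visited).2 ≤ pvMeasB n F visited ∧
    ((pvStepB board n F visited).1 ≠ [] →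
      pvMeasB n F (pvStepB board n F visited).2 < pvMeasB n F visited) ∧
    (∀ x ∈ (pvStepB board n F visited).1, x ∈ pvSpaceB n F) := by
  unfold pvStepB
  have main : ∀ (G : List ((Int × Int) × (Int × Int))),
      (∀ g ∈ G, g ∈ F) →
      ∀ (acc : PySem.Set ((Int × Int) × (Int × Int)) × PySem.Set ((Int × Int) × (Int × Int))),
      pvMeasB n F acc.2 ≤ pvMeasB n F visited →
      (acc.1 ≠ [] → pvMeasB n F acc.2 < pvMeasB n F visited) →
      (∀ x ∈ acc.1, x ∈ pvSpaceB n F) →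
      pvMeasB n F (G.foldl (fun acc s => (pvNbrs board n s).foldl (fun acc t =>
          if PySem.Set.contains acc.2 t then acc
          else (PySem.Set.add acc.1 t, PySem.Set.add acc.2 t)) acc) acc).2 ≤
        pvMeasB n F visited ∧
      ((G.foldl (fun acc s => (pvNbrs board n s).foldl (fun acc t =>
          if PySem.Set.contains acc.2 t then acc
          else (PySem.Set.add acc.1 t, PySem.Set.add acc.2 t)) acc) acc).1 ≠ [] →
        pvMeasB n F (G.foldl (fun acc s => (pvNbrs board n s).foldl (fun acc t =>
          if PySem.Set.contains acc.2 t then acc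
          else (PySem.Set.add acc.1 t, PySem.Set.add acc.2 t)) acc) acc).2 <
          pvMeasB n F visited) ∧
      (∀ x ∈ (G.foldl (fun acc s => (pvNbrs board n s).foldl (fun acc t =>
          if PySem.Set.contains acc.2 t then acc
          else (PySem.Set.add acc.1 t, PySem.Set.add acc.2 t)) acc) acc).1,
        x ∈ pvSpaceB n F) := by
    intro G
    induction G with
    | nil => intro _ acc hle hlt hsp; exact ⟨hle, hlt, hsp⟩
    | cons g G ih =>
      intro hG acc hle hlt hsp
      rw [List.foldl_cons]
      have hgF : g ∈ F := hG g List.mem_cons_self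
      have hnb : ∀ x ∈ pvNbrs board n g, x ∈ pvSpaceB n F := by
        apply pvNbrs_coords board n g (pvIccInt n ∪ pvCoordsB F)
        · intro x hx1 hx2
          exact Finset.mem_union_left _ ((pvIccInt_mem n x).mpr ⟨hx1, hx2⟩)
        · exact Finset.mem_union_right _ ((pvCoordsB_mem F _).mpr ⟨g, hgF, Or.inl rfl⟩)
        · exact Finset.mem_union_right _ ((pvCoordsB_mem F _).mpr ⟨g, hgF, Or.inr (Or.inl rfl)⟩)
        · exact Finset.mem_union_right _ ((pvCoordsB_mem F _).mpr
            ⟨g, hgF, Or.inr (Or.inr (Or.inl rfl))⟩)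
        · exact Finset.mem_union_right _ ((pvCoordsB_mem F _).mpr
            ⟨g, hgF, Or.inr (Or.inr (Or.inr rfl))⟩)
      have hstep := pvInner_dec board n F visited (pvNbrs board n g) hnb acc hle hlt hsp
      exact ih (fun g' hg' => hG g' (List.mem_cons_of_mem _ hg')) _
        hstep.1 hstep.2.1 hstep.2.2
  exact main F (fun g h => h) (PySem.Set.empty, visited) (le_refl _)
    (fun h => absurd rfl h) (by intro x hx; simp [PySem.Set.empty] at hx)

theorem pvMeasB_mono_space (n : Int) (q q' : List ((Int × Int) × (Int × Int)))
    (V : PySem.Set ((Int × Int) × (Int × Int))) (h : pvSpaceB n q' ⊆ pvSpaceB n q) :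
    pvMeasB n q' V ≤ pvMeasB n q V := by
  apply Finset.card_le_card
  intro x hx
  simp only [Finset.mem_filter] at hx ⊢
  exact ⟨h hx.1, hx.2⟩

def pvLoopB (board : List (List Int)) (n : Int)
    (frontier visited : PySem.Set ((Int × Int) × (Int × Int))) (d : Int) : Int :=
  if frontier.isEmpty then -1
  else if frontier.any (fun s => (s.1 == (n - 1, n - 1)) || (s.2 == (n - 1, n - 1))) then d
  else
    let acc := pvStepB board n frontier visited
    pvLoopB board n acc.1 acc.2 (d + 1)
termination_by (pvMeasB n frontier visited, frontier.length)
decreasing_by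
  rcases pvStepB_dec board n frontier visited with ⟨hle, hstrict, hsp⟩
  have hmono : pvMeasB n (pvStepB board n frontier visited).1
      (pvStepB board n frontier visited).2 ≤
      pvMeasB n frontier (pvStepB board n frontier visited).2 :=
    pvMeasB_mono_space n frontier _ _ (pvSpaceB_mono n frontier _ hsp)
  by_cases hnil : (pvStepB board n frontier visited).1 = []
  · rcases Nat.lt_or_ge (pvMeasB n (pvStepB board n frontier visited).1
        (pvStepB board n frontier visited).2) (pvMeasB n frontier visited) with hlt | hge
    · exact Prod.Lex.left _ _ hlt
    · have heq : pvMeasB n (pvStepB board n frontier visited).1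
          (pvStepB board n frontier visited).2 = pvMeasB n frontier visited :=
        le_antisymm (le_trans hmono hle) hge
      rw [heq, hnil]
      refine Prod.Lex.right _ ?_
      simp only [List.length_nil]
      have hF : frontier ≠ [] := by
        rename_i hne _
        intro hFe; rw [hFe] at hne; simp at hne
      exact List.length_pos_iff.mpr hF
  · exact Prod.Lex.left _ _ (lt_of_le_of_lt hmono (hstrict hnil))
-- ---- state abbreviations and bridges between A's ordered quadruples and B's sorted pairs ----
def pvToPair (t : Int × Int × Int × Int) : (Int × Int) × (Int × Int) :=
  ((t.1, t.2.1), (t.2.2.1, t.2.2.2))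

def pvNormQ (t : Int × Int × Int × Int) : (Int × Int) × (Int × Int) :=
  pvNorm (t.1, t.2.1) (t.2.2.1, t.2.2.2)

def pvGoalA (n : Int) (t : Int × Int × Int × Int) : Bool :=
  (t.1 == n - 1 && t.2.1 == n - 1) || (t.2.2.1 == n - 1 && t.2.2.2 == n - 1)

def pvGoalB (n : Int) (s : (Int × Int) × (Int × Int)) : Bool :=
  (s.1 == (n - 1, n - 1)) || (s.2 == (n - 1, n - 1))

def pvInRange (n : Int) (t : Int × Int × Int × Int) : Prop :=
  0 ≤ t.1 ∧ t.1 < n ∧ 0 ≤ t.2.1 ∧ t.2.1 < n ∧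
  0 ≤ t.2.2.1 ∧ t.2.2.1 < n ∧ 0 ≤ t.2.2.2 ∧ t.2.2.2 < n

def pvCandsQ (board : List (List Int)) (n : Int) (s : Int × Int × Int × Int) :
    List (Int × Int × Int × Int) :=
  pvCands board n s.1 s.2.1 s.2.2.1 s.2.2.2

theorem pvSwap_swap (t : Int × Int × Int × Int) : pvSwap (pvSwap t) = t := by
  obtain ⟨a, b, c, d⟩ := t; rfl

theorem pvLeC_iff (a b c d : Int) :
    pvLeC (a, b) (c, d) = true ↔ (a < c ∨ (a = c ∧ b ≤ d)) := by
  simp [pvLeC]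

theorem pvNormQ_swap (t : Int × Int × Int × Int) : pvNormQ (pvSwap t) = pvNormQ t := by
  obtain ⟨a, b, c, d⟩ := t
  show pvNorm (c, d) (a, b) = pvNorm (a, b) (c, d)
  unfold pvNorm
  by_cases h1 : pvLeC (c, d) (a, b) = true <;> by_cases h2 : pvLeC (a, b) (c, d) = true <;>
    rw [pvLeC_iff] at h1 h2
  · rw [if_pos (by rw [pvLeC_iff]; exact h1), if_pos (by rw [pvLeC_iff]; exact h2)]
    have ha : a = c := by omega
    have hb : b = d := by omega
    rw [ha, hb]
  · rw [if_pos (by rw [pvLeC_iff]; exact h1),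
      if_neg (by rw [pvLeC_iff]; exact h2)]
  · rw [if_neg (by rw [pvLeC_iff]; exact h1), if_pos (by rw [pvLeC_iff]; exact h2)]
  · exfalso; omega

theorem pvNormQ_eq_iff (u t : Int × Int × Int × Int) :
    pvNormQ u = pvNormQ t ↔ u = t ∨ u = pvSwap t := by
  constructor
  · intro h
    obtain ⟨a, b, c, d⟩ := u
    obtain ⟨e, f, g, k⟩ := t
    show (a, b, c, d) = (e, f, g, k) ∨ (a, b, c, d) = (g, k, e, f)
    have h' : pvNorm (a, b) (c, d) = pvNorm (e, f) (g, k) := h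
    unfold pvNorm at h'
    by_cases h1 : pvLeC (a, b) (c, d) = true <;> by_cases h2 : pvLeC (e, f) (g, k) = true
    · rw [if_pos h1, if_pos h2] at h'
      simp only [Prod.mk.injEq] at h'
      simp [Prod.mk.injEq]; tauto
    · rw [if_pos h1, if_neg h2] at h'
      simp only [Prod.mk.injEq] at h'
      simp [Prod.mk.injEq]; tauto
    · rw [if_neg h1, if_pos h2] at h'
      simp only [Prod.mk.injEq] at h'
      simp [Prod.mk.injEq]; tauto
    · rw [if_neg h1, if_neg h2] at h'
      simp only [Prod.mk.injEq] at h'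
      simp [Prod.mk.injEq]; tauto
  · rintro (rfl | rfl)
    · rfl
    · exact pvNormQ_swap t

def pvSym (V : PySem.Set (Int × Int × Int × Int)) : Prop :=
  ∀ u, u ∈ V → pvSwap u ∈ V

theorem pvSym_addpair (V : PySem.Set (Int × Int × Int × Int)) (t : Int × Int × Int × Int)
    (h : pvSym V) : pvSym (PySem.Set.add (PySem.Set.add V t) (pvSwap t)) := by
  intro u hu
  rcases (PySem.Set.mem_add _ _ _).mp hu with hu' | rfl
  · rcases (PySem.Set.mem_add _ _ _).mp hu' with hu'' | rfl
    · simp [PySem.Set.mem_add, h u hu'']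
    · simp [PySem.Set.mem_add]
  · simp [PySem.Set.mem_add, pvSwap_swap]

theorem pvNewV_sym (V : PySem.Set (Int × Int × Int × Int))
    (ts : List (Int × Int × Int × Int)) (h : pvSym V) : pvSym (pvNewV V ts) := by
  induction ts generalizing V with
  | nil => exact h
  | cons t ts ih =>
    by_cases hm : t ∈ V
    · rw [pvNewV, if_pos (by simpa using hm)]; exact ih V h
    · rw [pvNewV, if_neg (by simpa using hm)]
      exact ih _ (pvSym_addpair V t h)

theorem pvNewV_mem (V : PySem.Set (Int × Int × Int × Int))
    (ts : List (Int × Int × Int × Int)) (hS : pvSym V) (u : Int × Int × Int × Int) :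
    u ∈ pvNewV V ts ↔ u ∈ V ∨ ∃ t ∈ ts, pvNormQ u = pvNormQ t := by
  induction ts generalizing V with
  | nil => simp [pvNewV]
  | cons t ts ih =>
    by_cases hm : t ∈ V
    · rw [pvNewV, if_pos (by simpa using hm)]
      rw [ih V hS]
      constructor
      · rintro (h | ⟨t', ht', he⟩)
        · exact Or.inl h
        · exact Or.inr ⟨t', List.mem_cons_of_mem _ ht', he⟩
      · rintro (h | ⟨t', ht', he⟩)
        · exact Or.inl h
        · rcases List.mem_cons.mp ht' with rfl | ht''
          · rcases (pvNormQ_eq_iff u t').mp he with rfl | rfl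
            · exact Or.inl hm
            · exact Or.inl (hS t' hm)
          · exact Or.inr ⟨t', ht'', he⟩
    · rw [pvNewV, if_neg (by simpa using hm)]
      rw [ih _ (pvSym_addpair V t hS)]
      simp only [PySem.Set.mem_add]
      constructor
      · rintro (((h | h) | h) | ⟨t', ht', he⟩)
        · exact Or.inl h
        · exact Or.inr ⟨t, List.mem_cons_self, by rw [h]⟩
        · exact Or.inr ⟨t, List.mem_cons_self, by rw [h, pvNormQ_swap]⟩
        · exact Or.inr ⟨t', List.mem_cons_of_mem _ ht', he⟩
      · rintro (h | ⟨t', ht', he⟩)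
        · exact Or.inl (Or.inl (Or.inl h))  -- u ∈ V
        · rcases List.mem_cons.mp ht' with rfl | ht''
          · rcases (pvNormQ_eq_iff u t').mp he with rfl | rfl
            · exact Or.inl (Or.inl (Or.inr rfl))
            · exact Or.inl (Or.inr rfl)
          · exact Or.inr ⟨t', ht'', he⟩

theorem pvKept_norm_mem (V : PySem.Set (Int × Int × Int × Int))
    (ts : List (Int × Int × Int × Int)) (hS : pvSym V) (c : (Int × Int) × (Int × Int)) :
    (∃ k ∈ pvKept V ts, pvNormQ k = c) ↔
      (∃ t ∈ ts, pvNormQ t = c) ∧ ¬ (∃ v ∈ V, pvNormQ v = c) := by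
  induction ts generalizing V with
  | nil => simp [pvKept]
  | cons t ts ih =>
    by_cases hm : t ∈ V
    · rw [pvKept, if_pos (by simpa using hm)]
      rw [ih V hS]
      constructor
      · rintro ⟨⟨t', ht', he⟩, hnV⟩
        exact ⟨⟨t', List.mem_cons_of_mem _ ht', he⟩, hnV⟩
      · rintro ⟨⟨t', ht', he⟩, hnV⟩
        rcases List.mem_cons.mp ht' with rfl | ht''
        · exact absurd ⟨t', hm, he⟩ hnV
        · exact ⟨⟨t', ht'', he⟩, hnV⟩
    · rw [pvKept, if_neg (by simpa using hm)]
      have ih' := ih (PySem.Set.add (PySem.Set.add V t) (pvSwap t)) (pvSym_addpair V t hS)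
      constructor
      · rintro ⟨k, hk, hkc⟩
        rcases List.mem_cons.mp hk with rfl | hk'
        · refine ⟨⟨k, List.mem_cons_self, hkc⟩, ?_⟩
          rintro ⟨v, hv, hvc⟩
          rw [← hkc] at hvc
          rcases (pvNormQ_eq_iff v k).mp hvc with rfl | rfl
          · exact hm hv
          · exact hm (pvSwap_swap k ▸ hS _ hv)
        · obtain ⟨⟨t', ht', he⟩, hnV⟩ := ih'.mp ⟨k, hk', hkc⟩
          refine ⟨⟨t', List.mem_cons_of_mem _ ht', he⟩, ?_⟩
          rintro ⟨v, hv, hvc⟩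
          exact hnV ⟨v, (PySem.Set.mem_add _ _ _).mpr
            (Or.inl ((PySem.Set.mem_add _ _ _).mpr (Or.inl hv))), hvc⟩
      · rintro ⟨⟨t', ht', he⟩, hnV⟩
        rcases List.mem_cons.mp ht' with rfl | ht''
        · exact ⟨t', List.mem_cons_self, he⟩
        · by_cases hc : pvNormQ t = c
          · exact ⟨t, List.mem_cons_self, hc⟩
          · have hnV' : ¬ ∃ v ∈ PySem.Set.add (PySem.Set.add V t) (pvSwap t),
                pvNormQ v = c := by
              rintro ⟨v, hv, hvc⟩
              rcases (PySem.Set.mem_add _ _ _).mp hv with hv' | rfl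
              · rcases (PySem.Set.mem_add _ _ _).mp hv' with hv'' | rfl
                · exact hnV ⟨v, hv'', hvc⟩
                · exact hc hvc
              · exact hc (by rw [← pvNormQ_swap t]; exact hvc)
            obtain ⟨k, hk, hkc⟩ := ih'.mpr ⟨⟨t', ht'', he⟩, hnV'⟩
            exact ⟨k, List.mem_cons_of_mem _ hk, hkc⟩

def pvLevelA (board : List (List Int)) (n : Int) :
    List (Int × Int × Int × Int) → PySem.Set (Int × Int × Int × Int) →
      List (Int × Int × Int × Int) × PySem.Set (Int × Int × Int × Int)
  | [], V => ([], V)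
  | s :: L, V =>
    let K := pvKept V (pvCandsQ board n s)
    let V1 := pvNewV V (pvCandsQ board n s)
    let r := pvLevelA board n L V1
    (K ++ r.1, r.2)

theorem pvLoopA_nil (board : List (List Int)) (n : Int)
    (V : PySem.Set (Int × Int × Int × Int)) : pvLoopA board n [] V = -1 := by
  rw [pvLoopA]

theorem pvLoopA_cons (board : List (List Int)) (n : Int) (s : Int × Int × Int × Int) (d : Int)
    (rest : List (Int × Int × Int × Int × Int)) (V : PySem.Set (Int × Int × Int × Int)) :
    pvLoopA board n (pvTag d s :: rest) V =
      if pvGoalA n s then d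
      else pvLoopA board n
        (rest ++ (pvKept V (pvCandsQ board n s)).map (pvTag (d + 1)))
        (pvNewV V (pvCandsQ board n s)) := by
  obtain ⟨sx1, sy1, sx2, sy2⟩ := s
  rw [pvLoopA]
  show (if ((sx1 == n - 1 && sy1 == n - 1) || (sx2 == n - 1 && sy2 == n - 1)) = true then d
    else pvLoopA board n (pvStepA board n sx1 sy1 sx2 sy2 d (rest, V)).1
      (pvStepA board n sx1 sy1 sx2 sy2 d (rest, V)).2) = _
  rw [pvStepA_eq]
  rfl

theorem pvLevelA_loop (board : List (List Int)) (n : Int) (d : Int)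
    (L N : List (Int × Int × Int × Int)) (V : PySem.Set (Int × Int × Int × Int)) :
    pvLoopA board n (L.map (pvTag d) ++ N.map (pvTag (d + 1))) V =
      if L.any (pvGoalA n) then d
      else pvLoopA board n ((N ++ (pvLevelA board n L V).1).map (pvTag (d + 1)))
        (pvLevelA board n L V).2 := by
  induction L generalizing N V with
  | nil => simp [pvLevelA]
  | cons s L ih =>
    rw [List.map_cons, List.cons_append, pvLoopA_cons]
    by_cases hg : pvGoalA n s = true
    · rw [if_pos hg]
      have : (s :: L).any (pvGoalA n) = true := by simp [hg]
      rw [this, if_pos rfl]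
    · rw [if_neg hg]
      have : L.map (pvTag d) ++ N.map (pvTag (d + 1)) ++
          (pvKept V (pvCandsQ board n s)).map (pvTag (d + 1)) =
          L.map (pvTag d) ++ (N ++ pvKept V (pvCandsQ board n s)).map (pvTag (d + 1)) := by
        rw [List.map_append, List.append_assoc]
      rw [this, ih]
      have hany : (s :: L).any (pvGoalA n) = L.any (pvGoalA n) := by simp [hg]
      rw [hany]
      by_cases hLa : L.any (pvGoalA n) = true
      · rw [if_pos hLa, if_pos hLa]
      · rw [if_neg hLa, if_neg hLa]
        show pvLoopA board n ((N ++ pvKept V (pvCandsQ board n s) ++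
            (pvLevelA board n L (pvNewV V (pvCandsQ board n s))).1).map (pvTag (d + 1)))
            (pvLevelA board n L (pvNewV V (pvCandsQ board n s))).2 = _
        rw [show pvLevelA board n (s :: L) V =
          (pvKept V (pvCandsQ board n s) ++ (pvLevelA board n L (pvNewV V (pvCandsQ board n s))).1,
           (pvLevelA board n L (pvNewV V (pvCandsQ board n s))).2) from rfl]
        rw [List.append_assoc]

theorem pvLevelA_snd_mono (board : List (List Int)) (n : Int)
    (L : List (Int × Int × Int × Int)) (V : PySem.Set (Int × Int × Int × Int)) :
    ∀ u ∈ V, u ∈ (pvLevelA board n L V).2 := by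
  induction L generalizing V with
  | nil => intro u hu; exact hu
  | cons s L ih => intro u hu; exact ih _ u (pvNewV_mono _ _ u hu)

theorem pvLevelA_snd_mem (board : List (List Int)) (n : Int)
    (L : List (Int × Int × Int × Int)) (V : PySem.Set (Int × Int × Int × Int))
    (hS : pvSym V) (u : Int × Int × Int × Int) :
    u ∈ (pvLevelA board n L V).2 ↔
      u ∈ V ∨ ∃ s ∈ L, ∃ t ∈ pvCandsQ board n s, pvNormQ u = pvNormQ t := by
  induction L generalizing V with
  | nil => simp [pvLevelA]
  | cons s L ih =>
    show u ∈ (pvLevelA board n L (pvNewV V (pvCandsQ board n s))).2 ↔ _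
    rw [ih _ (pvNewV_sym _ _ hS), pvNewV_mem _ _ hS]
    constructor
    · rintro ((h | ⟨t, ht, he⟩) | ⟨s', hs', t, ht, he⟩)
      · exact Or.inl h
      · exact Or.inr ⟨s, List.mem_cons_self, t, ht, he⟩
      · exact Or.inr ⟨s', List.mem_cons_of_mem _ hs', t, ht, he⟩
    · rintro (h | ⟨s', hs', t, ht, he⟩)
      · exact Or.inl (Or.inl h)
      · rcases List.mem_cons.mp hs' with rfl | hs''
        · exact Or.inl (Or.inr ⟨t, ht, he⟩)
        · exact Or.inr ⟨s', hs'', t, ht, he⟩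

theorem pvLevelA_fst_norm (board : List (List Int)) (n : Int)
    (L : List (Int × Int × Int × Int)) (V : PySem.Set (Int × Int × Int × Int))
    (hS : pvSym V) (c : (Int × Int) × (Int × Int)) :
    (∃ k ∈ (pvLevelA board n L V).1, pvNormQ k = c) ↔
      (∃ s ∈ L, ∃ t ∈ pvCandsQ board n s, pvNormQ t = c) ∧ ¬ (∃ v ∈ V, pvNormQ v = c) := by
  induction L generalizing V with
  | nil => simp [pvLevelA]
  | cons s L ih =>
    show (∃ k ∈ pvKept V (pvCandsQ board n s) ++
        (pvLevelA board n L (pvNewV V (pvCandsQ board n s))).1, pvNormQ k = c) ↔ _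
    constructor
    · rintro ⟨k, hk, hkc⟩
      rcases List.mem_append.mp hk with hk' | hk'
      · obtain ⟨⟨t, ht, htc⟩, hnV⟩ := (pvKept_norm_mem V _ hS c).mp ⟨k, hk', hkc⟩
        exact ⟨⟨s, List.mem_cons_self, t, ht, htc⟩, hnV⟩
      · obtain ⟨⟨s', hs', t, ht, htc⟩, hnV⟩ :=
          (ih _ (pvNewV_sym _ _ hS)).mp ⟨k, hk', hkc⟩
        refine ⟨⟨s', List.mem_cons_of_mem _ hs', t, ht, htc⟩, ?_⟩
        rintro ⟨v, hv, hvc⟩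
        exact hnV ⟨v, pvNewV_mono _ _ v hv, hvc⟩
    · rintro ⟨⟨s', hs', t, ht, htc⟩, hnV⟩
      rcases List.mem_cons.mp hs' with rfl | hs''
      · obtain ⟨k, hk, hkc⟩ := (pvKept_norm_mem V _ hS c).mpr ⟨⟨t, ht, htc⟩, hnV⟩
        exact ⟨k, List.mem_append.mpr (Or.inl hk), hkc⟩
      · by_cases hmid : ∃ v ∈ pvNewV V (pvCandsQ board n s), pvNormQ v = c
        · obtain ⟨v, hv, hvc⟩ := hmid
          rcases (pvNewV_mem V _ hS v).mp hv with hvV | ⟨t', ht', he⟩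
          · exact absurd ⟨v, hvV, hvc⟩ hnV
          · obtain ⟨k, hk, hkc⟩ := (pvKept_norm_mem V _ hS c).mpr
              ⟨⟨t', ht', by rw [← he, hvc]⟩, hnV⟩
            exact ⟨k, List.mem_append.mpr (Or.inl hk), hkc⟩
        · obtain ⟨k, hk, hkc⟩ := (ih _ (pvNewV_sym _ _ hS)).mpr ⟨⟨s', hs'', t, ht, htc⟩, hmid⟩
          exact ⟨k, List.mem_append.mpr (Or.inr hk), hkc⟩

theorem pvLevelA_fst_sub (board : List (List Int)) (n : Int)
    (L : List (Int × Int × Int × Int)) (V : PySem.Set (Int × Int × Int × Int)) :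
    ∀ k ∈ (pvLevelA board n L V).1, (∃ s ∈ L, k ∈ pvCandsQ board n s) ∧ k ∉ V := by
  induction L generalizing V with
  | nil => intro k hk; simp [pvLevelA] at hk
  | cons s L ih =>
    intro k hk
    rcases List.mem_append.mp hk with hk' | hk'
    · obtain ⟨h1, h2⟩ := pvKept_sub V _ k hk'
      exact ⟨⟨s, List.mem_cons_self, h1⟩, h2⟩
    · obtain ⟨⟨s', hs', h1⟩, h2⟩ := ih _ k hk'
      exact ⟨⟨s', List.mem_cons_of_mem _ hs', h1⟩,
        fun hkV => h2 (pvNewV_mono _ _ k hkV)⟩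

theorem pvFoldl_append_list {α β : Type} (l : List β) (p : β → Bool) (f : β → List α)
    (acc : List α) :
    l.foldl (fun acc b => if p b then acc ++ f b else acc) acc =
      acc ++ (l.filter p).flatMap f := by
  induction l generalizing acc with
  | nil => simp
  | cons b l ih =>
    by_cases h : p b = true
    · simp [h, ih, List.filter_cons]
    · simp [h, ih, List.filter_cons]

theorem pvFilterMap_if {α β : Type} (l : List β) (p : β → Bool) (f : β → α) :
    l.filterMap (fun b => if p b then some (f b) else none) = (l.filter p).map f := by
  induction l with
  | nil => rfl
  | cons b l ih =>
    by_cases h : p b = true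
    · simp [List.filterMap_cons, h, ih, List.filter_cons]
    · simp [List.filterMap_cons, h, ih, List.filter_cons]

theorem pvFlatMap_if {α β : Type} (l : List β) (p : β → Bool) (f : β → List α) :
    l.flatMap (fun b => if p b then f b else []) = (l.filter p).flatMap f := by
  induction l with
  | nil => rfl
  | cons b l ih =>
    by_cases h : p b = true
    · simp [List.flatMap_cons, h, ih, List.filter_cons]
    · simp [List.flatMap_cons, h, ih, List.filter_cons]

theorem pvCands_inrange (board : List (List Int)) (n : Int) (s t : Int × Int × Int × Int)
    (hs : pvInRange n s) (ht : t ∈ pvCandsQ board n s) : pvInRange n t := by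
  obtain ⟨h1, h2, h3, h4⟩ := pvCands_coords board n s.1 s.2.1 s.2.2.1 s.2.2.2 t ht
  unfold pvInRange at hs ⊢
  unfold pvCoordOK at h1 h2 h3 h4
  omega

theorem pvCands_nonpos (board : List (List Int)) (n : Int) (s : Int × Int × Int × Int)
    (hn : n ≤ 0) : pvCandsQ board n s = [] := by
  have hT : ∀ a b c d : Int, pvGuardT board n a b c d = false := by
    intro a b c d
    apply Bool.eq_false_iff.mpr
    intro h
    simp only [pvGuardT, Bool.and_eq_true, decide_eq_true_eq] at h
    omega
  have hR : ∀ a b c d : Int, pvGuardR board n a b c d = false := by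
    intro a b c d
    apply Bool.eq_false_iff.mpr
    intro h
    simp only [pvGuardR, Bool.and_eq_true, decide_eq_true_eq] at h
    omega
  have hC : ∀ a b c d : Int, pvGuardC board n a b c d = false := by
    intro a b c d
    apply Bool.eq_false_iff.mpr
    intro h
    simp only [pvGuardC, Bool.and_eq_true, decide_eq_true_eq] at h
    omega
  unfold pvCandsQ pvCands
  split_ifs <;> simp [hT, hR, hC]

theorem pvFree_nonpos (board : List (List Int)) (n : Int) (hn : n ≤ 0) (r c : Int) :
    pvFree board n r c = false := by
  apply Bool.eq_false_iff.mpr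
  intro h
  simp only [pvFree, Bool.and_eq_true, decide_eq_true_eq] at h
  omega

theorem pvNbrs_nonpos (board : List (List Int)) (n : Int) (hn : n ≤ 0)
    (u : (Int × Int) × (Int × Int)) : pvNbrs board n u = [] := by
  unfold pvNbrs
  simp only [pvFree_nonpos board n hn, Bool.and_self, Bool.false_and]
  rw [pvFoldl_append_list, pvFoldl_append_list, pvFoldl_append_list]
  split_ifs <;> simp

-- Bool-shuffling identities between A's guards and B's pvFree conjunctions
theorem pvBool10 (b1 b2 b3 b4 b5 b6 b7 b8 c1 c2 : Bool) :
    ((((((b1 && b2) && b3) && b4) && c1) && ((((b5 && b6) && b7) && b8) && c2))) =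
      ((((((((((b1 && b2) && b3) && b4) && b5) && b6) && b7) && b8) && c1) && c2)) := by
  revert b1 b2 b3 b4 b5 b6 b7 b8 c1 c2; decide

theorem pvBool10c (b1 b2 b3 b4 b5 b6 b7 b8 c1 c2 : Bool) :
    ((((((((((b5 && b6) && b7) && b8) && b1) && b2) && b3) && b4) && c2) && c1)) =
      ((((((((((b1 && b2) && b3) && b4) && b5) && b6) && b7) && b8) && c1) && c2)) := by
  revert b1 b2 b3 b4 b5 b6 b7 b8 c1 c2; decide

theorem pvBool6R (b1 b2 b3 b4 c1 c2 : Bool) :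
    ((((((b1 && b2) && true) && true) && c1) && ((((b3 && b4) && true) && true) && c2))) =
      ((((((b1 && b2) && b3) && b4) && c1) && c2)) := by
  revert b1 b2 b3 b4 c1 c2; decide

theorem pvBool6C (b1 b2 b3 b4 c1 c2 : Bool) :
    (((((((true && true) && b1) && b2) && c1) && ((((true && true) && b3) && b4) && c2))) ) =
      (((((((b1 && b2) && b3) && b4) && c1) && c2))) := by
  revert b1 b2 b3 b4 c1 c2; decide

theorem pvBool6comm (b1 b2 b3 b4 c1 c2 : Bool) :
    ((((((b3 && b4) && b1) && b2) && c2) && c1)) = ((((((b1 && b2) && b3) && b4) && c1) && c2)) := by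
  revert b1 b2 b3 b4 c1 c2; decide

theorem pvGuardT_comm (board : List (List Int)) (n a1 b1 a2 b2 : Int) :
    pvGuardT board n a2 b2 a1 b1 = pvGuardT board n a1 b1 a2 b2 := by
  unfold pvGuardT
  exact pvBool10c _ _ _ _ _ _ _ _ _ _

theorem pvGuardR_comm (board : List (List Int)) (n a1 b1 a2 b2 : Int) :
    pvGuardR board n a2 b2 a1 b1 = pvGuardR board n a1 b1 a2 b2 := by
  unfold pvGuardR
  exact pvBool6comm _ _ _ _ _ _

theorem pvGuardC_comm (board : List (List Int)) (n a1 b1 a2 b2 : Int) :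
    pvGuardC board n a2 b2 a1 b1 = pvGuardC board n a1 b1 a2 b2 := by
  unfold pvGuardC
  exact pvBool6comm _ _ _ _ _ _

theorem pvBeq_comm (a b : Int) : (a == b) = (b == a) := by
  by_cases h : a = b
  · simp [h]
  · simp [beq_eq_false_iff_ne, h, Ne.symm h]

theorem pvNbrs_toPair (board : List (List Int)) (n : Int) (s : Int × Int × Int × Int)
    (hs : pvInRange n s) :
    pvNbrs board n (pvToPair s) = (pvCandsQ board n s).map pvNormQ := by
  obtain ⟨x1, y1, x2, y2⟩ := s
  obtain ⟨hx1a, hx1b, hy1a, hy1b, hx2a, hx2b, hy2a, hy2b⟩ := hs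
  have hdy1a : decide (0 ≤ y1) = true := by simpa using hy1a
  have hdy1b : decide (y1 < n) = true := by simpa using hy1b
  have hdy2a : decide (0 ≤ y2) = true := by simpa using hy2a
  have hdy2b : decide (y2 < n) = true := by simpa using hy2b
  have hdx1a : decide (0 ≤ x1) = true := by simpa using hx1a
  have hdx1b : decide (x1 < n) = true := by simpa using hx1b
  have hdx2a : decide (0 ≤ x2) = true := by simpa using hx2a
  have hdx2b : decide (x2 < n) = true := by simpa using hx2b
  have hgT : ∀ dir : Int × Int,
      (pvFree board n (x1 + dir.1) (y1 + dir.2) && pvFree board n (x2 + dir.1) (y2 + dir.2)) =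
        pvGuardT board n (x1 + dir.1) (y1 + dir.2) (x2 + dir.1) (y2 + dir.2) := by
    intro dir
    unfold pvFree pvGuardT
    exact pvBool10 _ _ _ _ _ _ _ _ _ _
  have hgR : ∀ dd : Int,
      (pvFree board n (x1 + dd) y1 && pvFree board n (x2 + dd) y2) =
        pvGuardR board n (x1 + dd) y1 (x2 + dd) y2 := by
    intro dd
    unfold pvFree pvGuardR
    rw [hdy1a, hdy1b, hdy2a, hdy2b]
    exact pvBool6R _ _ _ _ _ _
  have hgC : ∀ dd : Int,
      (pvFree board n x1 (y1 + dd) && pvFree board n x2 (y2 + dd)) =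
        pvGuardC board n x1 (y1 + dd) x2 (y2 + dd) := by
    intro dd
    unfold pvFree pvGuardC
    rw [hdx1a, hdx1b, hdx2a, hdx2b]
    exact pvBool6C _ _ _ _ _ _
  show pvNbrs board n ((x1, y1), (x2, y2)) = _
  unfold pvNbrs pvCandsQ pvCands
  rw [pvFoldl_append_list, pvFilterMap_if]
  simp only [List.nil_append]
  have htrans : (pvDirs.filter (fun dir =>
      pvFree board n (((x1, y1), (x2, y2)).1.1 + dir.1) (((x1, y1), (x2, y2)).1.2 + dir.2) &&
      pvFree board n (((x1, y1), (x2, y2)).2.1 + dir.1) (((x1, y1), (x2, y2)).2.2 + dir.2))).flatMap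
        (fun dir => [pvNorm (((x1, y1), (x2, y2)).1.1 + dir.1, ((x1, y1), (x2, y2)).1.2 + dir.2)
          (((x1, y1), (x2, y2)).2.1 + dir.1, ((x1, y1), (x2, y2)).2.2 + dir.2)]) =
      ((pvDirs.filter (fun dir =>
        pvGuardT board n (x1 + dir.1) (y1 + dir.2) (x2 + dir.1) (y2 + dir.2))).map
          (fun dir => (x1 + dir.1, y1 + dir.2, x2 + dir.1, y2 + dir.2))).map pvNormQ := by
    rw [List.map_map]
    rw [List.filter_congr (fun dir _ => hgT dir)]
    rw [List.map_eq_flatMap]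
    rfl
  rw [htrans]
  by_cases hx : (x1 == x2) = true
  · rw [if_pos hx, if_pos hx, pvFoldl_append_list, List.map_append, List.map_flatMap,
      ← pvFlatMap_if]
    congr 1
    congr 1
    funext dd
    rw [hgR dd]
    by_cases h : pvGuardR board n (x1 + dd) y1 (x2 + dd) y2 = true
    · rw [if_pos h, if_pos h]; simp [pvNormQ]
    · rw [if_neg h, if_neg h]; simp
  · rw [if_neg hx, if_neg hx]
    by_cases hy : (y1 == y2) = true
    · rw [if_pos hy, if_pos hy, pvFoldl_append_list, List.map_append, List.map_flatMap,
        ← pvFlatMap_if]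
      congr 1
      congr 1
      funext dd
      rw [hgC dd]
      by_cases h : pvGuardC board n x1 (y1 + dd) x2 (y2 + dd) = true
      · rw [if_pos h, if_pos h]; simp [pvNormQ]
      · rw [if_neg h, if_neg h]; simp
    · rw [if_neg hy, if_neg hy]
      simp

theorem pvCands_swap_norm_mp (board : List (List Int)) (n : Int) (s : Int × Int × Int × Int)
    (c : (Int × Int) × (Int × Int))
    (h : ∃ t ∈ pvCandsQ board n (pvSwap s), pvNormQ t = c) :
    ∃ t ∈ pvCandsQ board n s, pvNormQ t = c := by
  obtain ⟨x1, y1, x2, y2⟩ := s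
  obtain ⟨t, ht, rfl⟩ := h
  have ht' : t ∈ pvCands board n x2 y2 x1 y1 := ht
  unfold pvCands at ht'
  show ∃ t' ∈ pvCands board n x1 y1 x2 y2, pvNormQ t' = pvNormQ t
  unfold pvCands
  rcases List.mem_append.mp ht' with hT | hR
  · rcases List.mem_filterMap.mp hT with ⟨dir, hdir, heq⟩
    by_cases hg : pvGuardT board n (x2 + dir.1) (y2 + dir.2) (x1 + dir.1) (y1 + dir.2) = true
    · rw [if_pos hg] at heq
      obtain rfl : (x2 + dir.1, y2 + dir.2, x1 + dir.1, y1 + dir.2) = t :=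
        Option.some_injective _ heq
      refine ⟨(x1 + dir.1, y1 + dir.2, x2 + dir.1, y2 + dir.2),
        List.mem_append.mpr (Or.inl (List.mem_filterMap.mpr ⟨dir, hdir, ?_⟩)), ?_⟩
      · rw [if_pos (by rw [← pvGuardT_comm]; exact hg)]
      · exact (pvNormQ_swap (x1 + dir.1, y1 + dir.2, x2 + dir.1, y2 + dir.2)).symm
    · rw [if_neg hg] at heq; simp at heq
  · rw [pvBeq_comm x2 x1, pvBeq_comm y2 y1] at hR
    by_cases hx : (x1 == x2) = true
    · rw [if_pos hx] at hR
      rcases List.mem_flatMap.mp hR with ⟨dd, hdd, hmem⟩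
      by_cases hg : pvGuardR board n (x2 + dd) y2 (x1 + dd) y1 = true
      · rw [if_pos hg] at hmem
        have hg' : pvGuardR board n (x1 + dd) y1 (x2 + dd) y2 = true := by
          rw [← pvGuardR_comm]; exact hg
        refine ⟨t, List.mem_append.mpr (Or.inr ?_), rfl⟩
        rw [if_pos hx]
        refine List.mem_flatMap.mpr ⟨dd, hdd, ?_⟩
        rw [if_pos hg']
        rcases List.mem_cons.mp hmem with rfl | hmem'
        · simp
        · rcases List.mem_singleton.mp hmem' with rfl
          simp
      · rw [if_neg hg] at hmem; simp at hmem
    · rw [if_neg hx] at hR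
      by_cases hy : (y1 == y2) = true
      · rw [if_pos hy] at hR
        rcases List.mem_flatMap.mp hR with ⟨dd, hdd, hmem⟩
        by_cases hg : pvGuardC board n x2 (y2 + dd) x1 (y1 + dd) = true
        · rw [if_pos hg] at hmem
          have hg' : pvGuardC board n x1 (y1 + dd) x2 (y2 + dd) = true := by
            rw [← pvGuardC_comm]; exact hg
          refine ⟨t, List.mem_append.mpr (Or.inr ?_), rfl⟩
          rw [if_neg hx, if_pos hy]
          refine List.mem_flatMap.mpr ⟨dd, hdd, ?_⟩
          rw [if_pos hg']
          rcases List.mem_cons.mp hmem with rfl | hmem'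
          · simp
          · rcases List.mem_singleton.mp hmem' with rfl
            simp
        · rw [if_neg hg] at hmem; simp at hmem
      · rw [if_neg hy] at hR; simp at hR

theorem pvCands_swap_norm (board : List (List Int)) (n : Int) (s : Int × Int × Int × Int)
    (c : (Int × Int) × (Int × Int)) :
    (∃ t ∈ pvCandsQ board n (pvSwap s), pvNormQ t = c) ↔
      (∃ t ∈ pvCandsQ board n s, pvNormQ t = c) := by
  constructor
  · exact pvCands_swap_norm_mp board n s c
  · intro h
    have := pvCands_swap_norm_mp board n (pvSwap s) c
    rw [pvSwap_swap] at this
    exact this h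

theorem pvNormQ_cases (s : Int × Int × Int × Int) :
    pvNormQ s = pvToPair s ∨ pvNormQ s = pvToPair (pvSwap s) := by
  obtain ⟨x1, y1, x2, y2⟩ := s
  unfold pvNormQ pvNorm pvToPair pvSwap
  split
  · exact Or.inl rfl
  · exact Or.inr rfl

theorem pvInRange_swap (n : Int) (s : Int × Int × Int × Int) :
    pvInRange n (pvSwap s) ↔ pvInRange n s := by
  obtain ⟨x1, y1, x2, y2⟩ := s
  show (0 ≤ x2 ∧ x2 < n ∧ 0 ≤ y2 ∧ y2 < n ∧ 0 ≤ x1 ∧ x1 < n ∧ 0 ≤ y1 ∧ y1 < n) ↔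
    (0 ≤ x1 ∧ x1 < n ∧ 0 ≤ y1 ∧ y1 < n ∧ 0 ≤ x2 ∧ x2 < n ∧ 0 ≤ y2 ∧ y2 < n)
  omega

theorem pvGoal_norm (n : Int) (s : Int × Int × Int × Int) :
    pvGoalB n (pvNormQ s) = pvGoalA n s := by
  obtain ⟨x1, y1, x2, y2⟩ := s
  unfold pvGoalB pvGoalA pvNormQ pvNorm
  split
  · rfl
  · exact Bool.or_comm _ _

theorem pvLoopB_eq (board : List (List Int)) (n : Int)
    (F W : PySem.Set ((Int × Int) × (Int × Int))) (d : Int) :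
    pvLoopB board n F W d =
      if F.isEmpty then -1
      else if F.any (fun s => (s.1 == (n - 1, n - 1)) || (s.2 == (n - 1, n - 1))) then d
      else pvLoopB board n (pvStepB board n F W).1 (pvStepB board n F W).2 (d + 1) := by
  rw [pvLoopB]

theorem pvInnerB_mem (board : List (List Int)) (n : Int)
    (cs : List ((Int × Int) × (Int × Int))) :
    ∀ (acc : PySem.Set ((Int × Int) × (Int × Int)) × PySem.Set ((Int × Int) × (Int × Int)))
      (x : (Int × Int) × (Int × Int)),
    (x ∈ (cs.foldl (fun acc t => if PySem.Set.contains acc.2 t then acc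
        else (PySem.Set.add acc.1 t, PySem.Set.add acc.2 t)) acc).2 ↔
      x ∈ acc.2 ∨ x ∈ cs) ∧
    (x ∈ (cs.foldl (fun acc t => if PySem.Set.contains acc.2 t then acc
        else (PySem.Set.add acc.1 t, PySem.Set.add acc.2 t)) acc).1 ↔
      x ∈ acc.1 ∨ (x ∈ cs ∧ x ∉ acc.2)) := by
  induction cs with
  | nil => intro acc x; simp
  | cons t cs ih =>
    intro acc x
    rw [List.foldl_cons]
    by_cases hc : PySem.Set.contains acc.2 t = true
    · rw [if_pos hc]
      have htm : t ∈ acc.2 := List.mem_of_elem_eq_true hc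
      obtain ⟨ih2, ih1⟩ := ih acc x
      constructor
      · rw [ih2]
        constructor
        · rintro (h | h)
          · exact Or.inl h
          · exact Or.inr (List.mem_cons_of_mem _ h)
        · rintro (h | h)
          · exact Or.inl h
          · rcases List.mem_cons.mp h with rfl | h'
            · exact Or.inl htm
            · exact Or.inr h'
      · rw [ih1]
        constructor
        · rintro (h | ⟨h1, h2⟩)
          · exact Or.inl h
          · exact Or.inr ⟨List.mem_cons_of_mem _ h1, h2⟩
        · rintro (h | ⟨h1, h2⟩)
          · exact Or.inl h
          · rcases List.mem_cons.mp h1 with rfl | h'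
            · exact absurd htm h2
            · exact Or.inr ⟨h', h2⟩
    · rw [if_neg hc]
      have htm : t ∉ acc.2 := fun h => hc (List.elem_eq_true_of_mem h)
      obtain ⟨ih2, ih1⟩ := ih (PySem.Set.add acc.1 t, PySem.Set.add acc.2 t) x
      constructor
      · rw [ih2]
        show (x ∈ PySem.Set.add acc.2 t ∨ x ∈ cs) ↔ _
        rw [PySem.Set.mem_add]
        constructor
        · rintro ((h | rfl) | h)
          · exact Or.inl h
          · exact Or.inr List.mem_cons_self
          · exact Or.inr (List.mem_cons_of_mem _ h)
        · rintro (h | h)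
          · exact Or.inl (Or.inl h)
          · rcases List.mem_cons.mp h with rfl | h'
            · exact Or.inl (Or.inr rfl)
            · exact Or.inr h'
      · rw [ih1]
        show (x ∈ PySem.Set.add acc.1 t ∨ (x ∈ cs ∧ x ∉ PySem.Set.add acc.2 t)) ↔ _
        rw [PySem.Set.mem_add]
        constructor
        · rintro ((h | rfl) | ⟨h1, h2⟩)
          · exact Or.inl h
          · exact Or.inr ⟨List.mem_cons_self, htm⟩
          · refine Or.inr ⟨List.mem_cons_of_mem _ h1, fun hx => h2 ?_⟩
            rw [PySem.Set.mem_add]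
            exact Or.inl hx
        · rintro (h | ⟨h1, h2⟩)
          · exact Or.inl (Or.inl h)
          · rcases List.mem_cons.mp h1 with rfl | h'
            · exact Or.inl (Or.inr rfl)
            · by_cases hxt : x = t
              · exact Or.inl (Or.inr hxt)
              · refine Or.inr ⟨h', ?_⟩
                rw [PySem.Set.mem_add]
                rintro (h | h)
                · exact h2 h
                · exact hxt h

theorem pvStepB_mem (board : List (List Int)) (n : Int)
    (F : List ((Int × Int) × (Int × Int))) (W : PySem.Set ((Int × Int) × (Int × Int)))
    (x : (Int × Int) × (Int × Int)) :
    (x ∈ (pvStepB board n F W).2 ↔ x ∈ W ∨ ∃ s ∈ F, x ∈ pvNbrs board n s) ∧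
    (x ∈ (pvStepB board n F W).1 ↔ ∃ s ∈ F, x ∈ pvNbrs board n s ∧ x ∉ W) := by
  have main : ∀ (G : List ((Int × Int) × (Int × Int)))
      (acc : PySem.Set ((Int × Int) × (Int × Int)) × PySem.Set ((Int × Int) × (Int × Int))),
      (x ∈ (G.foldl (fun acc s => (pvNbrs board n s).foldl (fun acc t =>
          if PySem.Set.contains acc.2 t then acc
          else (PySem.Set.add acc.1 t, PySem.Set.add acc.2 t)) acc) acc).2 ↔
        x ∈ acc.2 ∨ ∃ s ∈ G, x ∈ pvNbrs board n s) ∧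
      (x ∈ (G.foldl (fun acc s => (pvNbrs board n s).foldl (fun acc t =>
          if PySem.Set.contains acc.2 t then acc
          else (PySem.Set.add acc.1 t, PySem.Set.add acc.2 t)) acc) acc).1 ↔
        x ∈ acc.1 ∨ ∃ s ∈ G, x ∈ pvNbrs board n s ∧ x ∉ acc.2) := by
    intro G
    induction G with
    | nil => intro acc; simp
    | cons g G ih =>
      intro acc
      rw [List.foldl_cons]
      obtain ⟨in2, in1⟩ := pvInnerB_mem board n (pvNbrs board n g) acc x
      obtain ⟨ih2, ih1⟩ := ih ((pvNbrs board n g).foldl (fun acc t =>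
        if PySem.Set.contains acc.2 t then acc
        else (PySem.Set.add acc.1 t, PySem.Set.add acc.2 t)) acc)
      constructor
      · rw [ih2, in2]
        constructor
        · rintro ((h | h) | ⟨s, hs, hx⟩)
          · exact Or.inl h
          · exact Or.inr ⟨g, List.mem_cons_self, h⟩
          · exact Or.inr ⟨s, List.mem_cons_of_mem _ hs, hx⟩
        · rintro (h | ⟨s, hs, hx⟩)
          · exact Or.inl (Or.inl h)
          · rcases List.mem_cons.mp hs with rfl | hs'
            · exact Or.inl (Or.inr hx)
            · exact Or.inr ⟨s, hs', hx⟩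
      · rw [ih1, in1]
        constructor
        · rintro ((h | ⟨h1, h2⟩) | ⟨s, hs, hx, hnx⟩)
          · exact Or.inl h
          · exact Or.inr ⟨g, List.mem_cons_self, h1, h2⟩
          · rw [in2] at hnx
            exact Or.inr ⟨s, List.mem_cons_of_mem _ hs, hx, fun hW => hnx (Or.inl hW)⟩
        · rintro (h | ⟨s, hs, hx, hnx⟩)
          · exact Or.inl (Or.inl h)
          · rcases List.mem_cons.mp hs with rfl | hs'
            · exact Or.inl (Or.inr ⟨hx, hnx⟩)
            · by_cases hg : x ∈ pvNbrs board n g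
              · exact Or.inl (Or.inr ⟨hg, hnx⟩)
              · refine Or.inr ⟨s, hs', hx, ?_⟩
                rw [in2]
                rintro (h | h)
                · exact hnx h
                · exact hg h
  obtain ⟨m2, m1⟩ := main F (PySem.Set.empty, W)
  constructor
  · rw [show (pvStepB board n F W).2 = (F.foldl (fun acc s => (pvNbrs board n s).foldl
      (fun acc t => if PySem.Set.contains acc.2 t then acc
        else (PySem.Set.add acc.1 t, PySem.Set.add acc.2 t)) acc)
      (PySem.Set.empty, W)).2 from rfl, m2]
  · rw [show (pvStepB board n F W).1 = (F.foldl (fun acc s => (pvNbrs board n s).foldl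
      (fun acc t => if PySem.Set.contains acc.2 t then acc
        else (PySem.Set.add acc.1 t, PySem.Set.add acc.2 t)) acc)
      (PySem.Set.empty, W)).1 from rfl, m1]
    simp [PySem.Set.empty]

def pvSpaceF (n : Int) : Finset (Int × Int × Int × Int) :=
  pvIccInt n ×ˢ (pvIccInt n ×ˢ (pvIccInt n ×ˢ pvIccInt n))

theorem pvSpaceF_mem (n : Int) (t : Int × Int × Int × Int) :
    t ∈ pvSpaceF n ↔ pvInRange n t := by
  simp only [pvSpaceF, Finset.mem_product, pvIccInt_mem, pvInRange]
  tauto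

theorem pvMain (board : List (List Int)) (n : Int) :
    ∀ (m : Nat) (V : PySem.Set (Int × Int × Int × Int))
      (W F : PySem.Set ((Int × Int) × (Int × Int)))
      (L : List (Int × Int × Int × Int)) (d : Int),
      ((pvSpaceF n).filter (fun t => ¬ t ∈ V)).card = m →
      (∀ u, u ∈ V ↔ pvNormQ u ∈ W) →
      (∀ x ∈ W, ∃ u, u ∈ V ∧ pvNormQ u = x) →
      (∀ x, x ∈ F ↔ ∃ s ∈ L, pvNormQ s = x) →
      (∀ s ∈ L, n ≤ 0 ∨ pvGoalA n s = true ∨ pvInRange n s) →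
      pvLoopA board n (L.map (pvTag d)) V = pvLoopB board n F W d := by
  intro m
  induction m using Nat.strong_induction_on with
  | _ m ih =>
  intro V W F L d hm hRel hBack hF hL
  have hSym : pvSym V := by
    intro u hu
    exact (hRel (pvSwap u)).mpr (by rw [pvNormQ_swap]; exact (hRel u).mp hu)
  cases L with
  | nil =>
    have hFnil : F = [] := List.eq_nil_iff_forall_not_mem.mpr (fun x hx => by
      rcases (hF x).mp hx with ⟨s, hs, -⟩; simp at hs)
    rw [List.map_nil, pvLoopA_nil, hFnil, pvLoopB_eq]
    simp
  | cons s0 L' =>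
    have hs0F : pvNormQ s0 ∈ F := (hF _).mpr ⟨s0, List.mem_cons_self, rfl⟩
    have hFne : F.isEmpty = false := by
      cases F
      · simp at hs0F
      · rfl
    have hLA := pvLevelA_loop board n d (s0 :: L') [] V
    rw [List.map_nil, List.append_nil] at hLA
    have hany : (s0 :: L').any (pvGoalA n) =
        F.any (fun s => (s.1 == (n - 1, n - 1)) || (s.2 == (n - 1, n - 1))) := by
      apply Bool.eq_iff_iff.mpr
      rw [List.any_eq_true, List.any_eq_true]
      constructor
      · rintro ⟨s, hs, hgs⟩
        refine ⟨pvNormQ s, (hF _).mpr ⟨s, hs, rfl⟩, ?_⟩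
        show pvGoalB n (pvNormQ s) = true
        rw [pvGoal_norm]; exact hgs
      · rintro ⟨x, hxF, hgx⟩
        rcases (hF x).mp hxF with ⟨s, hs, rfl⟩
        refine ⟨s, hs, ?_⟩
        rw [← pvGoal_norm n s]; exact hgx
    rw [pvLoopB_eq, hFne]
    simp only [Bool.false_eq_true, if_false]
    by_cases hga : (s0 :: L').any (pvGoalA n) = true
    · rw [hLA, if_pos hga, if_pos (by rw [← hany]; exact hga)]
    · rw [hLA, if_neg hga, if_neg (by rw [← hany]; exact hga),
        List.nil_append]
      have hnog : ∀ s ∈ (s0 :: L'), pvGoalA n s = false := by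
        intro s hs
        rcases Bool.eq_false_or_eq_true (pvGoalA n s) with h | h
        · exact absurd (List.any_eq_true.mpr ⟨s, hs, h⟩) hga
        · exact h
      have hLok : ∀ s ∈ (s0 :: L'), n ≤ 0 ∨ pvInRange n s := by
        intro s hs
        rcases hL s hs with h | h | h
        · exact Or.inl h
        · rw [hnog s hs] at h; simp at h
        · exact Or.inr h
      have hBridge : ∀ s ∈ (s0 :: L'), ∀ x, x ∈ pvNbrs board n (pvNormQ s) ↔
          ∃ t ∈ pvCandsQ board n s, pvNormQ t = x := by
        intro s hs x
        rcases hLok s hs with hn | hr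
        · rw [pvNbrs_nonpos board n hn, pvCands_nonpos board n s hn]
          simp
        · rcases pvNormQ_cases s with hcase | hcase
          · rw [hcase, pvNbrs_toPair board n s hr, List.mem_map]
          · rw [hcase, pvNbrs_toPair board n (pvSwap s) ((pvInRange_swap n s).mpr hr),
              List.mem_map]
            exact pvCands_swap_norm board n s x
      have hRel2 : ∀ u, u ∈ (pvLevelA board n (s0 :: L') V).2 ↔
          pvNormQ u ∈ (pvStepB board n F W).2 := by
        intro u
        rw [pvLevelA_snd_mem board n _ V hSym u, (pvStepB_mem board n F W (pvNormQ u)).1]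
        constructor
        · rintro (h | ⟨s, hs, t, ht, he⟩)
          · exact Or.inl ((hRel u).mp h)
          · refine Or.inr ⟨pvNormQ s, (hF _).mpr ⟨s, hs, rfl⟩, ?_⟩
            rw [hBridge s hs]
            exact ⟨t, ht, he.symm⟩
        · rintro (h | ⟨x, hxF, hxn⟩)
          · exact Or.inl ((hRel u).mpr h)
          · rcases (hF x).mp hxF with ⟨s, hs, rfl⟩
            rcases (hBridge s hs _).mp hxn with ⟨t, ht, he⟩
            exact Or.inr ⟨s, hs, t, ht, he.symm⟩
      have hBack2 : ∀ x ∈ (pvStepB board n F W).2,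
          ∃ u, u ∈ (pvLevelA board n (s0 :: L') V).2 ∧ pvNormQ u = x := by
        intro x hx
        rcases (pvStepB_mem board n F W x).1.mp hx with hW | ⟨x', hx'F, hxn⟩
        · obtain ⟨u, huV, hun⟩ := hBack x hW
          exact ⟨u, pvLevelA_snd_mono board n _ V u huV, hun⟩
        · rcases (hF x').mp hx'F with ⟨s, hs, rfl⟩
          rcases (hBridge s hs x).mp hxn with ⟨t, ht, he⟩
          refine ⟨t, ?_, he⟩
          rw [pvLevelA_snd_mem board n _ V hSym t]
          exact Or.inr ⟨s, hs, t, ht, rfl⟩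
      have hF2 : ∀ x, x ∈ (pvStepB board n F W).1 ↔
          ∃ k ∈ (pvLevelA board n (s0 :: L') V).1, pvNormQ k = x := by
        intro x
        rw [(pvStepB_mem board n F W x).2, pvLevelA_fst_norm board n _ V hSym x]
        constructor
        · rintro ⟨x', hx'F, hxn, hxW⟩
          rcases (hF x').mp hx'F with ⟨s, hs, rfl⟩
          rcases (hBridge s hs x).mp hxn with ⟨t, ht, he⟩
          refine ⟨⟨s, hs, t, ht, he⟩, ?_⟩
          rintro ⟨v, hv, hvc⟩
          exact hxW (by rw [← hvc]; exact (hRel v).mp hv)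
        · rintro ⟨⟨s, hs, t, ht, he⟩, hnV⟩
          refine ⟨pvNormQ s, (hF _).mpr ⟨s, hs, rfl⟩, ?_, ?_⟩
          · rw [hBridge s hs]
            exact ⟨t, ht, he⟩
          · intro hxW
            obtain ⟨u, huV, hun⟩ := hBack x hxW
            exact hnV ⟨u, huV, hun⟩
      have hL2 : ∀ k ∈ (pvLevelA board n (s0 :: L') V).1,
          n ≤ 0 ∨ pvGoalA n k = true ∨ pvInRange n k := by
        intro k hk
        obtain ⟨⟨s, hs, hkc⟩, -⟩ := pvLevelA_fst_sub board n _ V k hk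
        rcases hLok s hs with hn | hr
        · exact Or.inl hn
        · exact Or.inr (Or.inr (pvCands_inrange board n s k hr hkc))
      by_cases hKnil : (pvLevelA board n (s0 :: L') V).1 = []
      · have hnxt : (pvStepB board n F W).1 = [] :=
          List.eq_nil_iff_forall_not_mem.mpr (fun x hx => by
            rcases (hF2 x).mp hx with ⟨k, hk, -⟩
            rw [hKnil] at hk
            simp at hk)
        rw [hKnil, List.map_nil, pvLoopA_nil, hnxt, pvLoopB_eq]
        simp
      · obtain ⟨k0, hk0⟩ := List.exists_mem_of_ne_nil _ hKnil
        obtain ⟨⟨s, hs, hk0c⟩, hk0V⟩ := pvLevelA_fst_sub board n _ V k0 hk0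
        have hr : pvInRange n k0 := by
          rcases hLok s hs with hn | hr
          · rw [pvCands_nonpos board n s hn] at hk0c
            simp at hk0c
          · exact pvCands_inrange board n s k0 hr hk0c
        have hk0V2 : k0 ∈ (pvLevelA board n (s0 :: L') V).2 := by
          rw [pvLevelA_snd_mem board n _ V hSym k0]
          exact Or.inr ⟨s, hs, k0, hk0c, rfl⟩
        have hk0F : k0 ∈ (pvSpaceF n).filter (fun t => ¬ t ∈ V) :=
          Finset.mem_filter.mpr ⟨(pvSpaceF_mem n k0).mpr hr, hk0V⟩
        have hsub : (pvSpaceF n).filter (fun t => ¬ t ∈ (pvLevelA board n (s0 :: L') V).2) ⊆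
            ((pvSpaceF n).filter (fun t => ¬ t ∈ V)).erase k0 := by
          intro x hx
          simp only [Finset.mem_filter, Finset.mem_erase] at hx ⊢
          refine ⟨?_, hx.1, fun hxV => hx.2 (pvLevelA_snd_mono board n _ V x hxV)⟩
          rintro rfl
          exact hx.2 hk0V2
        have hlt : ((pvSpaceF n).filter
            (fun t => ¬ t ∈ (pvLevelA board n (s0 :: L') V).2)).card < m := by
          rw [← hm]
          calc ((pvSpaceF n).filter
              (fun t => ¬ t ∈ (pvLevelA board n (s0 :: L') V).2)).card
              ≤ (((pvSpaceF n).filter (fun t => ¬ t ∈ V)).erase k0).card :=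
                Finset.card_le_card hsub
            _ < ((pvSpaceF n).filter (fun t => ¬ t ∈ V)).card :=
                Finset.card_erase_lt_of_mem hk0F
        exact ih _ hlt (pvLevelA board n (s0 :: L') V).2 (pvStepB board n F W).2
          (pvStepB board n F W).1 (pvLevelA board n (s0 :: L') V).1 (d + 1) rfl
          hRel2 hBack2 hF2 hL2

-- A's BFS equals the level-synchronized BFS over normalized pair states
theorem pvA_loopB (board : List (List Int)) :
    solution board = pvLoopB board (board.length : Int)
      (PySem.Set.add PySem.Set.empty ((0, 0), (0, 1)))
      (PySem.Set.add PySem.Set.empty ((0, 0), (0, 1))) 0 := by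
  unfold solution
  show pvLoopA board (board.length : Int)
      ([((0 : Int), (0 : Int), (0 : Int), (1 : Int))].map (pvTag 0))
      (PySem.Set.add (PySem.Set.add PySem.Set.empty (0, 0, 0, 1)) (0, 1, 0, 0)) =
    pvLoopB board (board.length : Int) (PySem.Set.add PySem.Set.empty ((0, 0), (0, 1)))
      (PySem.Set.add PySem.Set.empty ((0, 0), (0, 1))) 0
  have hmemV : ∀ u : Int × Int × Int × Int,
      u ∈ PySem.Set.add (PySem.Set.add PySem.Set.empty ((0 : Int), (0 : Int), (0 : Int), (1 : Int))) (0, 1, 0, 0) ↔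
        u = (0, 0, 0, 1) ∨ u = (0, 1, 0, 0) := by
    intro u
    rw [PySem.Set.mem_add, PySem.Set.mem_add]
    simp [PySem.Set.empty]
  have hmemW : ∀ x : (Int × Int) × (Int × Int),
      x ∈ PySem.Set.add PySem.Set.empty (((0 : Int), (0 : Int)), ((0 : Int), (1 : Int))) ↔
        x = ((0, 0), (0, 1)) := by
    intro x
    rw [PySem.Set.mem_add]
    simp [PySem.Set.empty]
  have hnq : pvNormQ ((0 : Int), (0 : Int), (0 : Int), (1 : Int)) = ((0, 0), (0, 1)) := by decide
  have hsw : pvSwap ((0 : Int), (0 : Int), (0 : Int), (1 : Int)) = (0, 1, 0, 0) := by decide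
  apply pvMain board (board.length : Int)
    (((pvSpaceF (board.length : Int)).filter (fun t => ¬ t ∈
      (PySem.Set.add (PySem.Set.add PySem.Set.empty ((0 : Int), (0 : Int), (0 : Int), (1 : Int))) (0, 1, 0, 0)))).card)
    _ _ _ _ _ rfl
  · intro u
    rw [hmemV u, hmemW (pvNormQ u), ← hnq]
    rw [pvNormQ_eq_iff u ((0 : Int), (0 : Int), (0 : Int), (1 : Int)), hsw]
  · intro x hx
    rw [hmemW x] at hx
    exact ⟨(0, 0, 0, 1), (hmemV _).mpr (Or.inl rfl), by rw [hnq, hx]⟩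
  · intro x
    rw [hmemW x]
    constructor
    · rintro rfl
      exact ⟨(0, 0, 0, 1), List.mem_cons_self, hnq⟩
    · rintro ⟨s, hs, rfl⟩
      rcases List.mem_cons.mp hs with rfl | h
      · exact hnq
      · simp at h
  · intro s hs
    rcases List.mem_cons.mp hs with rfl | h
    · rcases lt_trichotomy (board.length : Int) 1 with h1 | h1 | h1
      · exact Or.inl (by omega)
      · refine Or.inr (Or.inl ?_)
        rw [show ((board.length : Int)) = 1 from h1]
        decide
      · refine Or.inr (Or.inr ?_)
        show (0 : Int) ≤ 0 ∧ (0 : Int) < (board.length : Int) ∧ (0 : Int) ≤ 0 ∧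
          (0 : Int) < (board.length : Int) ∧ (0 : Int) ≤ 0 ∧ (0 : Int) < (board.length : Int) ∧
          (0 : Int) ≤ 1 ∧ (1 : Int) < (board.length : Int)
        omega
    · simp at h
-- ---- pvRound: restatements of pvRound_spec at the (D, false) start (definitional) ----
theorem pvRound_get? (board : List (List Int)) (n : Int)
    (D : PySem.Dict ((Int × Int) × (Int × Int)) Int) (r : Int)
    (x : (Int × Int) × (Int × Int)) :
    (pvRound board n D r).1.get? x =
      if PySem.Dict.contains D x = true then PySem.Dict.get? D x
      else if ∃ s ∈ PySem.Dict.keys D, x ∈ pvNbrs board n s then some r else none :=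
  (pvRound_spec board n r (PySem.Dict.keys D) (D, false)).1 x

theorem pvRound_contains (board : List (List Int)) (n : Int)
    (D : PySem.Dict ((Int × Int) × (Int × Int)) Int) (r : Int)
    (x : (Int × Int) × (Int × Int)) :
    (pvRound board n D r).1.contains x =
      (PySem.Dict.contains D x || decide (∃ s ∈ PySem.Dict.keys D, x ∈ pvNbrs board n s)) :=
  (pvRound_spec board n r (PySem.Dict.keys D) (D, false)).2.1 x

theorem pvRound_flag (board : List (List Int)) (n : Int)
    (D : PySem.Dict ((Int × Int) × (Int × Int)) Int) (r : Int) :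
    (pvRound board n D r).2 =
      decide (∃ s ∈ PySem.Dict.keys D, ∃ t ∈ pvNbrs board n s,
        PySem.Dict.contains D t = false) := by
  have h := (pvRound_spec board n r (PySem.Dict.keys D) (D, false)).2.2.1
  rw [show (pvRound board n D r).2 = ((PySem.Dict.keys D).foldl (fun acc s =>
    (pvNbrs board n s).foldl (fun acc t => if PySem.Dict.contains acc.1 t then acc
      else (PySem.Dict.insert acc.1 t r, true)) acc) (D, false)).2 from rfl, h]
  rw [Bool.false_or]

theorem pvRound_nodup (board : List (List Int)) (n : Int)
    (D : PySem.Dict ((Int × Int) × (Int × Int)) Int) (r : Int)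
    (h : (PySem.Dict.keys D).Nodup) : (PySem.Dict.keys (pvRound board n D r).1).Nodup :=
  (pvRound_spec board n r (PySem.Dict.keys D) (D, false)).2.2.2 h

-- ---- saturation loop: flag monotonicity, stability, value preservation ----
theorem pvInnerFlag_mono (r : Int) (cs : List ((Int × Int) × (Int × Int))) :
    ∀ (acc : PySem.Dict ((Int × Int) × (Int × Int)) Int × Bool), acc.2 = true →
    (cs.foldl (fun acc t => if PySem.Dict.contains acc.1 t then acc
      else (PySem.Dict.insert acc.1 t r, true)) acc).2 = true := by
  induction cs with
  | nil => intro acc h; exact h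
  | cons t cs ih =>
    intro acc h
    rw [List.foldl_cons]
    by_cases hc : PySem.Dict.contains acc.1 t = true
    · rw [if_pos hc]; exact ih acc h
    · rw [if_neg hc]; exact ih _ rfl

theorem pvInner_stable (r : Int) (cs : List ((Int × Int) × (Int × Int))) :
    ∀ (acc : PySem.Dict ((Int × Int) × (Int × Int)) Int × Bool),
    (cs.foldl (fun acc t => if PySem.Dict.contains acc.1 t then acc
      else (PySem.Dict.insert acc.1 t r, true)) acc).2 = false →
    (cs.foldl (fun acc t => if PySem.Dict.contains acc.1 t then acc
      else (PySem.Dict.insert acc.1 t r, true)) acc) = acc := by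
  induction cs with
  | nil => intro acc _; rfl
  | cons t cs ih =>
    intro acc h
    rw [List.foldl_cons] at h ⊢
    by_cases hc : PySem.Dict.contains acc.1 t = true
    · rw [if_pos hc] at h ⊢; exact ih acc h
    · rw [if_neg hc] at h
      rw [pvInnerFlag_mono r cs _ rfl] at h
      cases h

theorem pvOuterFlag_mono (board : List (List Int)) (n : Int) (r : Int)
    (G : List ((Int × Int) × (Int × Int))) :
    ∀ (acc : PySem.Dict ((Int × Int) × (Int × Int)) Int × Bool), acc.2 = true →
    (G.foldl (fun acc s => (pvNbrs board n s).foldl (fun acc t =>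
      if PySem.Dict.contains acc.1 t then acc
      else (PySem.Dict.insert acc.1 t r, true)) acc) acc).2 = true := by
  induction G with
  | nil => intro acc h; exact h
  | cons g G ih =>
    intro acc h
    rw [List.foldl_cons]
    exact ih _ (pvInnerFlag_mono r (pvNbrs board n g) acc h)

theorem pvOuter_stable (board : List (List Int)) (n : Int) (r : Int)
    (G : List ((Int × Int) × (Int × Int))) :
    ∀ (acc : PySem.Dict ((Int × Int) × (Int × Int)) Int × Bool),
    (G.foldl (fun acc s => (pvNbrs board n s).foldl (fun acc t =>
      if PySem.Dict.contains acc.1 t then acc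
      else (PySem.Dict.insert acc.1 t r, true)) acc) acc).2 = false →
    (G.foldl (fun acc s => (pvNbrs board n s).foldl (fun acc t =>
      if PySem.Dict.contains acc.1 t then acc
      else (PySem.Dict.insert acc.1 t r, true)) acc) acc) = acc := by
  induction G with
  | nil => intro acc _; rfl
  | cons g G ih =>
    intro acc h
    rw [List.foldl_cons] at h ⊢
    have hmid : ((pvNbrs board n g).foldl (fun acc t =>
        if PySem.Dict.contains acc.1 t then acc
        else (PySem.Dict.insert acc.1 t r, true)) acc).2 = false := by
      by_cases ht : ((pvNbrs board n g).foldl (fun acc t =>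
          if PySem.Dict.contains acc.1 t then acc
          else (PySem.Dict.insert acc.1 t r, true)) acc).2 = true
      · rw [pvOuterFlag_mono board n r G _ ht] at h; cases h
      · simpa using ht
    rw [pvInner_stable r (pvNbrs board n g) acc hmid] at h ⊢
    exact ih acc h

theorem pvRound_stable (board : List (List Int)) (n : Int)
    (D : PySem.Dict ((Int × Int) × (Int × Int)) Int) (r : Int)
    (h : (pvRound board n D r).2 = false) : (pvRound board n D r).1 = D := by
  have := pvOuter_stable board n r (PySem.Dict.keys D) (D, false) h
  rw [show pvRound board n D r = (PySem.Dict.keys D).foldl (fun acc s =>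
    (pvNbrs board n s).foldl (fun acc t => if PySem.Dict.contains acc.1 t then acc
      else (PySem.Dict.insert acc.1 t r, true)) acc) (D, false) from rfl, this]

-- values already present survive saturation; values added later are larger
theorem pvSat_ext (board : List (List Int)) (n : Int) :
    ∀ (m : Nat) (D : PySem.Dict ((Int × Int) × (Int × Int)) Int) (r : Int),
      pvMeasD n D = m → (PySem.Dict.keys D).Nodup →
      ((PySem.Dict.keys (pvSatLoop board n D r)).Nodup ∧
       (∀ x v, PySem.Dict.get? D x = some v →
         PySem.Dict.get? (pvSatLoop board n D r) x = some v) ∧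
       (∀ x v, PySem.Dict.get? (pvSatLoop board n D r) x = some v →
         PySem.Dict.get? D x = some v ∨ r + 1 ≤ v)) := by
  intro m
  induction m using Nat.strong_induction_on with
  | _ m ih =>
  intro D r hm hnd
  rw [pvSatLoop]
  by_cases hflag : (pvRound board n D (r + 1)).2 = true
  · rw [dif_pos hflag]
    have hlt : pvMeasD n (pvRound board n D (r + 1)).1 < m := by
      rw [← hm]; exact pvRound_dec board n D (r + 1) hflag
    obtain ⟨snod, spres, slow⟩ := ih _ hlt (pvRound board n D (r + 1)).1 (r + 1) rfl
      (pvRound_nodup board n D (r + 1) hnd)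
    refine ⟨snod, ?_, ?_⟩
    · intro x v hx
      apply spres
      have hcx : PySem.Dict.contains D x = true := by
        rw [PySem.Dict.contains_eq_isSome_get?, hx]; rfl
      rw [pvRound_get? board n D (r + 1) x, if_pos hcx]
      exact hx
    · intro x v hx
      rcases slow x v hx with hmid | hge
      · rw [pvRound_get? board n D (r + 1) x] at hmid
        by_cases hcx : PySem.Dict.contains D x = true
        · rw [if_pos hcx] at hmid; exact Or.inl hmid
        · rw [if_neg hcx] at hmid
          by_cases hex : ∃ s ∈ PySem.Dict.keys D, x ∈ pvNbrs board n s
          · rw [if_pos hex] at hmid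
            have := Option.some.inj hmid
            right; omega
          · rw [if_neg hex] at hmid; cases hmid
      · exact Or.inr (by omega)
  · rw [dif_neg hflag]
    have hflag' : (pvRound board n D (r + 1)).2 = false := by simpa using hflag
    rw [pvRound_stable board n D (r + 1) hflag']
    exact ⟨hnd, fun x v h => h, fun x v h => Or.inl h⟩

-- ---- min-query fold lemmas ----
theorem pvMinFold_const (g : ((Int × Int) × (Int × Int)) → Bool)
    (l : List (((Int × Int) × (Int × Int)) × Int)) :
    ∀ acc : Int, (∀ p ∈ l, g p.1 = false) →
    l.foldl (fun best p => if g p.1 && ((best == -1) || decide (p.2 < best))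
      then p.2 else best) acc = acc := by
  induction l with
  | nil => intro acc _; rfl
  | cons p l ih =>
    intro acc h
    rw [List.foldl_cons, if_neg (by rw [h p List.mem_cons_self]; simp)]
    exact ih acc (fun q hq => h q (List.mem_cons_of_mem _ hq))

theorem pvMinFold_min (g : ((Int × Int) × (Int × Int)) → Bool) (d : Int) (hd : 0 ≤ d)
    (l : List (((Int × Int) × (Int × Int)) × Int)) :
    ∀ acc : Int, (∀ p ∈ l, g p.1 = true → d ≤ p.2) → (acc = -1 ∨ d ≤ acc) →
      ((acc = -1 ∨ d < acc) → ∃ p ∈ l, g p.1 = true ∧ p.2 = d) →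
    l.foldl (fun best p => if g p.1 && ((best == -1) || decide (p.2 < best))
      then p.2 else best) acc = d := by
  induction l with
  | nil =>
    intro acc _ hacc hex
    rw [List.foldl_nil]
    by_cases h1 : acc = -1
    · obtain ⟨p, hp, -⟩ := hex (Or.inl h1); cases hp
    · by_cases h2 : d < acc
      · obtain ⟨p, hp, -⟩ := hex (Or.inr h2); cases hp
      · rcases hacc with h | h
        · exact absurd h h1
        · omega
  | cons p l ih =>
    intro acc hall hacc hex
    rw [List.foldl_cons]
    have hallT : ∀ q ∈ l, g q.1 = true → d ≤ q.2 :=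
      fun q hq hgq => hall q (List.mem_cons_of_mem _ hq) hgq
    by_cases hg : g p.1 = true
    · have hdp : d ≤ p.2 := hall p List.mem_cons_self hg
      by_cases hcnd : ((acc == -1) || decide (p.2 < acc)) = true
      · rw [if_pos (by rw [hg, hcnd]; rfl)]
        refine ih p.2 hallT (Or.inr hdp) ?_
        intro hc
        have hp2 : d < p.2 := by rcases hc with hc | hc <;> omega
        have hold : acc = -1 ∨ d < acc := by
          by_cases hae : acc = -1
          · exact Or.inl hae
          · have h1 : (acc == -1) = false := by simpa using hae
            rw [h1, Bool.false_or] at hcnd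
            have := of_decide_eq_true hcnd
            omega
        obtain ⟨q, hq, hgq, hqd⟩ := hex hold
        rcases List.mem_cons.mp hq with rfl | hq'
        · omega
        · exact ⟨q, hq', hgq, hqd⟩
      · have hF : ((acc == -1) || decide (p.2 < acc)) = false := by simpa using hcnd
        rw [if_neg (by rw [hF]; simp)]
        obtain ⟨hao1, hao2⟩ := Bool.or_eq_false_iff.mp hF
        have hane : acc ≠ -1 := by simpa using hao1
        have hge : ¬ p.2 < acc := of_decide_eq_false hao2
        refine ih acc hallT hacc ?_
        intro hc
        obtain ⟨q, hq, hgq, hqd⟩ := hex hc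
        rcases List.mem_cons.mp hq with rfl | hq'
        · exfalso
          rcases hc with hc | hc
          · exact hane hc
          · omega
        · exact ⟨q, hq', hgq, hqd⟩
    · have hgf : g p.1 = false := by simpa using hg
      rw [if_neg (by rw [hgf]; simp)]
      refine ih acc hallT hacc ?_
      intro hc
      obtain ⟨q, hq, hgq, hqd⟩ := hex hc
      rcases List.mem_cons.mp hq with rfl | hq'
      · rw [hgf] at hgq; cases hgq
      · exact ⟨q, hq', hgq, hqd⟩
-- ---- in-range pair states ----
def pvInRangeP (n : Int) (s : (Int × Int) × (Int × Int)) : Prop :=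
  0 ≤ s.1.1 ∧ s.1.1 < n ∧ 0 ≤ s.1.2 ∧ s.1.2 < n ∧
  0 ≤ s.2.1 ∧ s.2.1 < n ∧ 0 ≤ s.2.2 ∧ s.2.2 < n

def pvSpaceP (n : Int) : Finset ((Int × Int) × (Int × Int)) :=
  (pvIccInt n ×ˢ pvIccInt n) ×ˢ (pvIccInt n ×ˢ pvIccInt n)

theorem pvSpaceP_mem (n : Int) (x : (Int × Int) × (Int × Int)) :
    x ∈ pvSpaceP n ↔ pvInRangeP n x := by
  simp only [pvSpaceP, Finset.mem_product, pvIccInt_mem, pvInRangeP]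
  tauto

theorem pvNbrs_start_one (board : List (List Int)) :
    pvNbrs board 1 ((0, 0), (0, 1)) = [] := by
  simp [pvNbrs, pvDirs, pvFree]

theorem pvNbrs_inrange (board : List (List Int)) (n : Int) (s : (Int × Int) × (Int × Int))
    (hs : pvInRangeP n s ∨ s = ((0, 0), (0, 1))) :
    ∀ t ∈ pvNbrs board n s, pvInRangeP n t := by
  have hcase : pvInRangeP n s → ∀ t ∈ pvNbrs board n s, pvInRangeP n t := by
    intro hr t ht
    obtain ⟨h1, h2, h3, h4, h5, h6, h7, h8⟩ := hr
    have hmem := pvNbrs_coords board n s (pvIccInt n)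
      (fun x hx1 hx2 => (pvIccInt_mem n x).mpr ⟨hx1, hx2⟩)
      ((pvIccInt_mem n _).mpr ⟨h1, h2⟩) ((pvIccInt_mem n _).mpr ⟨h3, h4⟩)
      ((pvIccInt_mem n _).mpr ⟨h5, h6⟩) ((pvIccInt_mem n _).mpr ⟨h7, h8⟩)
      t ht
    simp only [Finset.mem_product, pvIccInt_mem] at hmem
    exact ⟨hmem.1.1.1, hmem.1.1.2, hmem.1.2.1, hmem.1.2.2,
      hmem.2.1.1, hmem.2.1.2, hmem.2.2.1, hmem.2.2.2⟩
  rcases hs with hr | rfl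
  · exact hcase hr
  · rcases lt_trichotomy n 1 with h1 | h1 | h1
    · rw [pvNbrs_nonpos board n (by omega)]
      intro t ht; cases ht
    · rw [h1, pvNbrs_start_one board]
      intro t ht; cases ht
    · exact hcase ⟨le_refl 0, show (0 : Int) < n by omega, le_refl 0,
        show (0 : Int) < n by omega, le_refl 0, show (0 : Int) < n by omega,
        show (0 : Int) ≤ 1 by omega, h1⟩

-- ---- the main bridge: level BFS = complete saturation + min-query ----
theorem pvSatBridge (board : List (List Int)) (n : Int) :
    ∀ (m : Nat) (F W : PySem.Set ((Int × Int) × (Int × Int)))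
      (D : PySem.Dict ((Int × Int) × (Int × Int)) Int) (d : Int),
      ((pvSpaceP n).filter (fun t => ¬ t ∈ W)).card = m →
      0 ≤ d →
      (PySem.Dict.keys D).Nodup →
      (∀ x, x ∈ PySem.Dict.keys D ↔ x ∈ W) →
      (∀ x, x ∈ F ↔ PySem.Dict.get? D x = some d) →
      (∀ x v, PySem.Dict.get? D x = some v → 0 ≤ v ∧ v ≤ d) →
      (∀ x v, PySem.Dict.get? D x = some v → v < d →
        pvGoalB n x = false ∧ ∀ t ∈ pvNbrs board n x, t ∈ PySem.Dict.keys D) →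
      (∀ x ∈ PySem.Dict.keys D, pvInRangeP n x ∨ x = ((0, 0), (0, 1))) →
      pvLoopB board n F W d = pvMinQuery n (pvSatLoop board n D d) := by
  intro m
  induction m using Nat.strong_induction_on with
  | _ m ih =>
  intro F W D d hm hd0 hnd hKW hF hvals hlow hrange
  have hkeysome : ∀ x ∈ PySem.Dict.keys D, ∃ v, PySem.Dict.get? D x = some v := by
    intro x hx
    cases h : PySem.Dict.get? D x with
    | none => exact absurd hx ((PySem.Dict.get?_eq_none_iff_not_mem_keys _ _).mp h)
    | some v => exact ⟨v, rfl⟩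
  have hsomemem : ∀ (x : (Int × Int) × (Int × Int)) (v : Int),
      PySem.Dict.get? D x = some v → x ∈ PySem.Dict.keys D := by
    intro x v h
    rw [← PySem.Dict.contains_iff_mem_keys _ _, PySem.Dict.contains_eq_isSome_get?, h]; rfl
  have hsrcF : ∀ s ∈ PySem.Dict.keys D, ∀ t ∈ pvNbrs board n s,
      PySem.Dict.contains D t = false → s ∈ F := by
    intro s hs t ht hct
    obtain ⟨v, hv⟩ := hkeysome s hs
    have hvd : v ≤ d := (hvals s v hv).2
    by_cases hlt : v < d
    · exfalso
      have hmem := (hlow s v hv hlt).2 t ht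
      rw [← PySem.Dict.contains_iff_mem_keys _ _] at hmem
      rw [hmem] at hct; cases hct
    · have hveq : v = d := by omega
      rw [hveq] at hv
      exact (hF s).mpr hv
  rw [pvLoopB_eq]
  by_cases hFe : F.isEmpty = true
  · rw [if_pos hFe]
    have hFnil : F = [] := List.isEmpty_iff.mp hFe
    have hflag : (pvRound board n D (d + 1)).2 = false := by
      rw [pvRound_flag]
      apply decide_eq_false
      rintro ⟨s, hs, t, ht, hct⟩
      have := hsrcF s hs t ht hct
      rw [hFnil] at this; cases this
    rw [pvSatLoop, dif_neg (by rw [hflag]; simp), pvRound_stable board n D (d + 1) hflag]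
    symm
    rw [show pvMinQuery n D = (PySem.Dict.items D).foldl (fun best p =>
      if pvGoalB n p.1 && ((best == -1) || decide (p.2 < best)) then p.2 else best) (-1)
      from rfl]
    apply pvMinFold_const
    intro p hp
    have hpg : PySem.Dict.get? D p.1 = some p.2 := PySem.Dict.get?_of_mem_items _ hp hnd
    have hle : p.2 ≤ d := (hvals _ _ hpg).2
    by_cases hl : p.2 < d
    · exact (hlow _ _ hpg hl).1
    · have hpeq : p.2 = d := by omega
      rw [hpeq] at hpg
      have := (hF p.1).mpr hpg
      rw [hFnil] at this; cases this
  · have hFe' : F.isEmpty = false := by simpa using hFe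
    rw [hFe']
    simp only [Bool.false_eq_true, if_false]
    by_cases hg : F.any (fun s => (s.1 == (n - 1, n - 1)) || (s.2 == (n - 1, n - 1))) = true
    · rw [if_pos hg]
      obtain ⟨s0, hs0F, hgs0⟩ := List.any_eq_true.mp hg
      have hs0D : PySem.Dict.get? D s0 = some d := (hF s0).mp hs0F
      obtain ⟨snod, spres, slow⟩ := pvSat_ext board n (pvMeasD n D) D d rfl hnd
      have hfin : PySem.Dict.get? (pvSatLoop board n D d) s0 = some d := spres s0 d hs0D
      symm
      rw [show pvMinQuery n (pvSatLoop board n D d) =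
        (PySem.Dict.items (pvSatLoop board n D d)).foldl (fun best p =>
          if pvGoalB n p.1 && ((best == -1) || decide (p.2 < best)) then p.2 else best) (-1)
        from rfl]
      apply pvMinFold_min (pvGoalB n) d hd0
      · intro p hp hpg
        have hps : PySem.Dict.get? (pvSatLoop board n D d) p.1 = some p.2 :=
          PySem.Dict.get?_of_mem_items _ hp snod
        rcases slow p.1 p.2 hps with hD | hge
        · have hle := (hvals _ _ hD).2
          by_cases hl : p.2 < d
          · rw [(hlow _ _ hD hl).1] at hpg; cases hpg
          · omega
        · omega
      · exact Or.inl rfl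
      · intro _
        refine ⟨(s0, d), PySem.Dict.mem_items_of_get?_eq_some _ hfin, ?_, rfl⟩
        exact hgs0
    · rw [if_neg hg]
      have hnog : ∀ s ∈ F, pvGoalB n s = false := by
        intro s hs
        by_cases h : pvGoalB n s = true
        · exact absurd (List.any_eq_true.mpr ⟨s, hs, h⟩) hg
        · simpa using h
      have hFkeys : ∀ x ∈ F, x ∈ PySem.Dict.keys D :=
        fun x hx => hsomemem x d ((hF x).mp hx)
      by_cases hflag : (pvRound board n D (d + 1)).2 = true
      · rw [pvSatLoop, dif_pos hflag]
        have hflagP : ∃ s ∈ PySem.Dict.keys D, ∃ t ∈ pvNbrs board n s,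
            PySem.Dict.contains D t = false := by
          rw [pvRound_flag] at hflag
          exact of_decide_eq_true hflag
        obtain ⟨s0, hs0, t0, ht0, hct0⟩ := hflagP
        have hs0F : s0 ∈ F := hsrcF s0 hs0 t0 ht0 hct0
        have ht0W : t0 ∉ W := by
          intro h
          have hmem := (hKW t0).mpr h
          rw [← PySem.Dict.contains_iff_mem_keys _ _] at hmem
          rw [hmem] at hct0; cases hct0
        have ht0W' : t0 ∈ (pvStepB board n F W).2 :=
          (pvStepB_mem board n F W t0).1.mpr (Or.inr ⟨s0, hs0F, ht0⟩)
        have ht0R : pvInRangeP n t0 :=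
          pvNbrs_inrange board n s0 (hrange s0 hs0) t0 ht0
        have hWW' : ∀ x, x ∈ W → x ∈ (pvStepB board n F W).2 :=
          fun x hx => (pvStepB_mem board n F W x).1.mpr (Or.inl hx)
        have hlt : ((pvSpaceP n).filter
            (fun t => ¬ t ∈ (pvStepB board n F W).2)).card < m := by
          rw [← hm]
          have hsub : (pvSpaceP n).filter (fun t => ¬ t ∈ (pvStepB board n F W).2) ⊆
              ((pvSpaceP n).filter (fun t => ¬ t ∈ W)).erase t0 := by
            intro x hx
            simp only [Finset.mem_filter, Finset.mem_erase] at hx ⊢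
            refine ⟨?_, hx.1, fun h => hx.2 (hWW' x h)⟩
            rintro rfl
            exact hx.2 ht0W'
          calc ((pvSpaceP n).filter (fun t => ¬ t ∈ (pvStepB board n F W).2)).card
              ≤ (((pvSpaceP n).filter (fun t => ¬ t ∈ W)).erase t0).card :=
                Finset.card_le_card hsub
            _ < ((pvSpaceP n).filter (fun t => ¬ t ∈ W)).card :=
                Finset.card_erase_lt_of_mem (Finset.mem_filter.mpr
                  ⟨(pvSpaceP_mem n t0).mpr ht0R, ht0W⟩)
        have inv_KW : ∀ x, x ∈ PySem.Dict.keys (pvRound board n D (d + 1)).1 ↔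
            x ∈ (pvStepB board n F W).2 := by
          intro x
          rw [(pvStepB_mem board n F W x).1, ← PySem.Dict.contains_iff_mem_keys,
            pvRound_contains]
          constructor
          · intro h
            by_cases hc : PySem.Dict.contains D x = true
            · exact Or.inl ((hKW x).mp ((PySem.Dict.contains_iff_mem_keys _ _).mp hc))
            · have hc' : PySem.Dict.contains D x = false := by simpa using hc
              rw [hc', Bool.false_or] at h
              obtain ⟨s, hs, hxs⟩ := of_decide_eq_true h
              exact Or.inr ⟨s, hsrcF s hs x hxs hc', hxs⟩
          · rintro (h | ⟨s, hs, hxs⟩)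
            · have hc : PySem.Dict.contains D x = true := by
                rw [PySem.Dict.contains_iff_mem_keys _ _]; exact (hKW x).mpr h
              rw [hc, Bool.true_or]
            · have hc : decide (∃ s ∈ PySem.Dict.keys D, x ∈ pvNbrs board n s) = true :=
                decide_eq_true ⟨s, hFkeys s hs, hxs⟩
              rw [hc, Bool.or_true]
        have inv_F : ∀ x, x ∈ (pvStepB board n F W).1 ↔
            PySem.Dict.get? (pvRound board n D (d + 1)).1 x = some (d + 1) := by
          intro x
          rw [(pvStepB_mem board n F W x).2, pvRound_get?]
          by_cases hc : PySem.Dict.contains D x = true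
          · rw [if_pos hc]
            have hxW : x ∈ W := (hKW x).mp ((PySem.Dict.contains_iff_mem_keys _ _).mp hc)
            constructor
            · rintro ⟨s, hs, hxs, hxw⟩; exact absurd hxW hxw
            · intro h
              have := (hvals x (d + 1) h).2
              omega
          · have hc' : PySem.Dict.contains D x = false := by simpa using hc
            rw [if_neg hc]
            have hxW : x ∉ W := by
              intro h
              have hmem := (hKW x).mpr h
              rw [← PySem.Dict.contains_iff_mem_keys _ _] at hmem
              rw [hmem] at hc'; cases hc'
            constructor
            · rintro ⟨s, hs, hxs, -⟩
              rw [if_pos ⟨s, hFkeys s hs, hxs⟩]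
            · intro h
              by_cases hex : ∃ s ∈ PySem.Dict.keys D, x ∈ pvNbrs board n s
              · obtain ⟨s, hs, hxs⟩ := hex
                exact ⟨s, hsrcF s hs x hxs hc', hxs, hxW⟩
              · rw [if_neg hex] at h; cases h
        have inv_vals : ∀ x v, PySem.Dict.get? (pvRound board n D (d + 1)).1 x = some v →
            0 ≤ v ∧ v ≤ d + 1 := by
          intro x v h
          rw [pvRound_get?] at h
          by_cases hc : PySem.Dict.contains D x = true
          · rw [if_pos hc] at h
            have := hvals x v h
            omega
          · rw [if_neg hc] at h
            by_cases hex : ∃ s ∈ PySem.Dict.keys D, x ∈ pvNbrs board n s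
            · rw [if_pos hex] at h
              have := Option.some.inj h
              omega
            · rw [if_neg hex] at h; cases h
        have hmemnew : ∀ t : (Int × Int) × (Int × Int),
            (∃ s ∈ PySem.Dict.keys D, t ∈ pvNbrs board n s) →
            t ∈ PySem.Dict.keys (pvRound board n D (d + 1)).1 := by
          intro t hex
          rw [← PySem.Dict.contains_iff_mem_keys _ _, pvRound_contains,
            decide_eq_true hex, Bool.or_true]
        have inv_low : ∀ x v, PySem.Dict.get? (pvRound board n D (d + 1)).1 x = some v →
            v < d + 1 → pvGoalB n x = false ∧
              ∀ t ∈ pvNbrs board n x, t ∈ PySem.Dict.keys (pvRound board n D (d + 1)).1 := by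
          intro x v h hvlt
          rw [pvRound_get?] at h
          by_cases hc : PySem.Dict.contains D x = true
          · rw [if_pos hc] at h
            have hxk : x ∈ PySem.Dict.keys D := (PySem.Dict.contains_iff_mem_keys _ _).mp hc
            have hle := (hvals x v h).2
            by_cases hl : v < d
            · exact ⟨(hlow x v h hl).1, fun t ht => hmemnew t ⟨x, hxk, ht⟩⟩
            · have hveq : v = d := by omega
              rw [hveq] at h
              exact ⟨hnog x ((hF x).mpr h), fun t ht => hmemnew t ⟨x, hxk, ht⟩⟩
          · rw [if_neg hc] at h
            by_cases hex : ∃ s ∈ PySem.Dict.keys D, x ∈ pvNbrs board n s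
            · rw [if_pos hex] at h
              have := Option.some.inj h
              omega
            · rw [if_neg hex] at h; cases h
        have inv_range : ∀ x ∈ PySem.Dict.keys (pvRound board n D (d + 1)).1,
            pvInRangeP n x ∨ x = ((0, 0), (0, 1)) := by
          intro x hx
          rw [← PySem.Dict.contains_iff_mem_keys _ _, pvRound_contains] at hx
          by_cases hc : PySem.Dict.contains D x = true
          · exact hrange x ((PySem.Dict.contains_iff_mem_keys _ _).mp hc)
          · have hc' : PySem.Dict.contains D x = false := by simpa using hc
            rw [hc', Bool.false_or] at hx
            obtain ⟨s, hs, hxs⟩ := of_decide_eq_true hx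
            exact Or.inl (pvNbrs_inrange board n s (hrange s hs) x hxs)
        exact ih _ hlt (pvStepB board n F W).1 (pvStepB board n F W).2
          (pvRound board n D (d + 1)).1 (d + 1) rfl (by omega)
          (pvRound_nodup board n D (d + 1) hnd) inv_KW inv_F inv_vals inv_low inv_range
      · have hflag' : (pvRound board n D (d + 1)).2 = false := by simpa using hflag
        have hF'nil : (pvStepB board n F W).1 = [] := by
          apply List.eq_nil_iff_forall_not_mem.mpr
          intro x hx
          obtain ⟨s, hs, hxs, hxW⟩ := (pvStepB_mem board n F W x).2.mp hx
          have hcx : PySem.Dict.contains D x = false := by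
            by_cases h : PySem.Dict.contains D x = true
            · exact absurd ((hKW x).mp ((PySem.Dict.contains_iff_mem_keys _ _).mp h)) hxW
            · simpa using h
          have hcon : (pvRound board n D (d + 1)).2 = true := by
            rw [pvRound_flag]
            exact decide_eq_true ⟨s, hFkeys s hs, x, hxs, hcx⟩
          rw [hflag'] at hcon; cases hcon
        rw [hF'nil, pvLoopB_eq]
        simp only [List.isEmpty_nil, if_true]
        rw [pvSatLoop, dif_neg (by rw [hflag']; simp),
          pvRound_stable board n D (d + 1) hflag']
        symm
        rw [show pvMinQuery n D = (PySem.Dict.items D).foldl (fun best p =>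
          if pvGoalB n p.1 && ((best == -1) || decide (p.2 < best)) then p.2 else best) (-1)
          from rfl]
        apply pvMinFold_const
        intro p hp
        have hpg : PySem.Dict.get? D p.1 = some p.2 := PySem.Dict.get?_of_mem_items _ hp hnd
        have hle : p.2 ≤ d := (hvals _ _ hpg).2
        by_cases hl : p.2 < d
        · exact (hlow _ _ hpg hl).1
        · have hpeq : p.2 = d := by omega
          rw [hpeq] at hpg
          exact hnog p.1 ((hF p.1).mpr hpg)

-- ===== VERDICT (by name: the statement is the Claim_ definition above) =====
theorem solution_spec : Claim_equal_solution := by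
  intro board _ _
  show solution board = solution_alt board
  rw [pvA_loopB]
  show pvLoopB board (board.length : Int)
      (PySem.Set.add PySem.Set.empty ((0, 0), (0, 1)))
      (PySem.Set.add PySem.Set.empty ((0, 0), (0, 1))) 0 =
    pvMinQuery (board.length : Int) (pvSatLoop board (board.length : Int)
      (PySem.Dict.insert PySem.Dict.empty ((0, 0), (0, 1)) 0) 0)
  have hget : ∀ x : (Int × Int) × (Int × Int),
      PySem.Dict.get? (PySem.Dict.insert
        (PySem.Dict.empty : PySem.Dict ((Int × Int) × (Int × Int)) Int)
        ((0, 0), (0, 1)) 0) x =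
        if x = ((0, 0), (0, 1)) then some 0 else none := by
    intro x
    rw [PySem.Dict.get?_insert]
    by_cases h : x = ((0, 0), (0, 1)) <;> simp [h, PySem.Dict.get?_empty]
  have hkeys : PySem.Dict.keys (PySem.Dict.insert
      (PySem.Dict.empty : PySem.Dict ((Int × Int) × (Int × Int)) Int)
      ((0, 0), (0, 1)) 0) = [((0, 0), (0, 1))] := by decide
  have hW : ∀ x : (Int × Int) × (Int × Int),
      x ∈ PySem.Set.add (PySem.Set.empty) (((0 : Int), (0 : Int)), ((0 : Int), (1 : Int))) ↔
        x = ((0, 0), (0, 1)) := by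
    intro x; rw [PySem.Set.mem_add]; simp [PySem.Set.empty]
  refine pvSatBridge board (board.length : Int) _ _ _ _ _ rfl (le_refl 0)
    (by rw [hkeys]; exact List.nodup_singleton _) ?_ ?_ ?_ ?_ ?_
  · intro x; rw [hkeys, hW x]; simp
  · intro x
    rw [hW x, hget x]
    by_cases h : x = ((0, 0), (0, 1)) <;> simp [h]
  · intro x v h
    rw [hget x] at h
    by_cases hx : x = ((0, 0), (0, 1))
    · rw [if_pos hx] at h
      have := Option.some.inj h
      omega
    · rw [if_neg hx] at h; cases h
  · intro x v h hlt
    rw [hget x] at h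
    by_cases hx : x = ((0, 0), (0, 1))
    · rw [if_pos hx] at h
      have := Option.some.inj h
      omega
    · rw [if_neg hx] at h; cases h
  · intro x hx
    rw [hkeys] at hx
    right; simpa using hx
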